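-- pv_equiv track=rewrite | github.com/eunseo-kim/Algorithm | programmers/위클리 챌린지/02_퍼즐 조각 채우기.py | get_target_blocks
-- ===== SOURCE A (Python) =====
-- from collections import deque
--
-- def get_target_blocks(array, target):
--     N = len(array)
--     visited = [[False for _ in range(N)] for _ in range(N)]
--     moves = [[1, 0], [0, 1], [-1, 0], [0, -1]]
--
--     def bfs(row, col):
--         queue = deque()
--         queue.append([row, col])
--
--         empty_block = []
--         while queue:
--             r, c = queue.popleft()
--             visited[r][c] = True
--             empty_block.append([r, c])
--
--             for m_r, m_c in moves:
--                 n_r, n_c = r + m_r, c + m_c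
--                 if 0 <= n_r < N and 0 <= n_c < N and not visited[n_r][n_c] and array[n_r][n_c] == target:
--                     queue.append([n_r, n_c])
--
--         return empty_block
--
--     def change_to_standard_zero_block(empty_block):
--         min_row = min(empty_block, key=lambda x: x[0])[0]
--         min_col = min(empty_block, key=lambda x: x[1])[1]
--
--         max_row_size = max(empty_block, key=lambda x: x[0])[0] - min_row + 1
--         max_col_size = max(empty_block, key=lambda x: x[1])[1] - min_col + 1
--         standard_N = max(max_row_size, max_col_size)
--
--         new_square_board = [[0 for _ in range(standard_N)] for _ in range(standard_N)]
--
--         for r, c in empty_block: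
--             r -= min_row
--             c -= min_col
--             new_square_board[r][c] = 1
--
--         return new_square_board
--
--     target_blocks = []
--     for row in range(N):
--         for col in range(N):
--             if not visited[row][col] and array[row][col] == target:
--                 empty_block = bfs(row, col)
--                 new_square_board = change_to_standard_zero_block(empty_block)
--                 target_blocks.append(new_square_board)
--
--     return target_blocks
-- ===== SOURCE B (Python) =====
-- def get_target_blocks(array, target):
--     n = len(array)
--     # single-pass connected-component labeling: up/left neighbor labels, merge-on-conflict
--     label = {}                      # cell -> component id
--     members = {}                    # component id -> list of its cells
--     nid = 0
--     for r in range(n):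
--         for c in range(n):
--             if array[r][c] != target:
--                 continue
--             lu = label.get((r - 1, c))
--             ll = label.get((r, c - 1))
--             if lu is None and ll is None:
--                 lab = nid
--                 nid += 1
--                 members[lab] = []
--             elif lu is None:
--                 lab = ll
--             elif ll is None or lu == ll:
--                 lab = lu
--             else:
--                 for cell in members[ll]:
--                     label[cell] = lu
--                 members[lu].extend(members[ll])
--                 del members[ll]
--                 lab = lu
--             label[(r, c)] = lab
--             members[lab].append((r, c))
--     blocks = []
--     emitted = set()
--     for r in range(n):
--         for c in range(n):
--             if array[r][c] != target:
--                 continue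
--             lab = label[(r, c)]
--             if lab in emitted:
--                 continue
--             emitted.add(lab)
--             cells = members[lab]
--             mr = min(p[0] for p in cells)
--             mc = min(p[1] for p in cells)
--             k = max(max(p[0] for p in cells) - mr, max(p[1] for p in cells) - mc) + 1
--             cellset = set(cells)
--             blocks.append([[1 if (mr + i, mc + j) in cellset else 0
--                             for j in range(k)] for i in range(k)])
--     return blocks
-- ===== Notes on version B (the rewrite author's own statement) =====
-- stated objective: alternative
-- what changed: Replaces A's per-component BFS flood fill (deque worklist seeded at each unvisited target cell, N x N visited matrix) by single-pass connected-component labeling: one raster scan assigns each target cell the label of its up/left neighbor (merging the two label classes when they conflict) while accumulating the cells of each label in a dict, and a second scan emits each label's normalized board at its first cell in scan order; no worklist, no visited matrix, no per-cell neighborhood search. Pre_ excludes arrays with a row shorter than len(array), on which A raises IndexError.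
import Mathlib
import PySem

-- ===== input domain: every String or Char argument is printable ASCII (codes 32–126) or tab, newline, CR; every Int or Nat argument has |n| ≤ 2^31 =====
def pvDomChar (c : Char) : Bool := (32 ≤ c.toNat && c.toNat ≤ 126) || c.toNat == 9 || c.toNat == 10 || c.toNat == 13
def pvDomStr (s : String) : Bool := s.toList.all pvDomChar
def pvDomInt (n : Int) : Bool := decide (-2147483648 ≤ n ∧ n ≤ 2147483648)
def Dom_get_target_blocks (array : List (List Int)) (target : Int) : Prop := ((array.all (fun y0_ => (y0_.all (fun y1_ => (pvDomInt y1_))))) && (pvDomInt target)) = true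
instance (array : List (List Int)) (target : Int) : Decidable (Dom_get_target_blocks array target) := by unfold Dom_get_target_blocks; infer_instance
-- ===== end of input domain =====

-- B replaces A's per-component BFS flood fill (deque worklist, N×N visited matrix) by
-- single-pass connected-component labeling: one raster scan gives each target cell the
-- label of its up/left neighbour (merging the two classes on a conflict) while a dict
-- accumulates the cells of each label, and a second scan emits each label's normalized
-- board at its first cell in scan order (objective: alternative algorithm, same cost).
-- Python A's N×N boolean `visited` matrix is modeled as a Bool-valued function on (row, col)
-- pairs (exact: it is only read and written at in-grid indices). 2-D list reads/writes use
-- PySem.List.pyGetD/pySetD, exact here because every used index is provably in range.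

def pvAt (array : List (List Int)) (r c : Int) : Int :=
  PySem.List.pyGetD (PySem.List.pyGetD array r []) c 0

def pvInGrid (n : Int) (p : Int × Int) : Bool :=
  decide (0 ≤ p.1) && decide (p.1 < n) && decide (0 ≤ p.2) && decide (p.2 < n)

def pvGridCells (n : Int) : List (Int × Int) :=
  (PySem.List.pyRange 0 n 1).flatMap (fun r => (PySem.List.pyRange 0 n 1).map (fun c => (r, c)))

def pvMoves : List (Int × Int) := [(1,0),(0,1),(-1,0),(0,-1)]

theorem pv_countP_mono {α : Type} (l : List α) (f g : α → Bool)
    (h : ∀ x ∈ l, f x = true → g x = true) : l.countP f ≤ l.countP g := by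
  induction l with
  | nil => simp
  | cons x t ih =>
    have ht := ih (fun y hy => h y (List.mem_cons_of_mem _ hy))
    by_cases hf : f x = true
    · have hg := h x (List.mem_cons_self) hf
      simp [hf, hg]; omega
    · simp only [List.countP_cons]
      rcases Bool.eq_false_or_eq_true (g x) with hg | hg <;>
        simp [hg, Bool.eq_false_iff.mpr hf] <;> omega

theorem pv_countP_lt {α : Type} [DecidableEq α] (l : List α) (f g : α → Bool) (a : α)
    (ha : a ∈ l) (h : ∀ x ∈ l, f x = true → g x = true)
    (hga : g a = true) (hfa : f a = false) : l.countP f < l.countP g := by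
  induction l with
  | nil => cases ha
  | cons x t ih =>
    have hmono := pv_countP_mono t f g (fun y hy => h y (List.mem_cons_of_mem _ hy))
    by_cases hxa : x = a
    · subst hxa
      simp [List.countP_cons, hfa, hga]; omega
    · have ha' : a ∈ t := by
        rcases List.mem_cons.mp ha with h1 | h1
        · exact absurd h1.symm hxa
        · exact h1
      have ht := ih ha' (fun y hy => h y (List.mem_cons_of_mem _ hy))
      by_cases hf : f x = true
      · have hg := h x List.mem_cons_self hf
        simp [List.countP_cons, hf, hg]; omega
      · simp only [List.countP_cons]
        rcases Bool.eq_false_or_eq_true (g x) with hg | hg <;>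
          simp [hg, Bool.eq_false_iff.mpr hf] <;> omega

theorem pv_mem_gridCells (n : Int) (p : Int × Int) :
    p ∈ pvGridCells n ↔ pvInGrid n p = true := by
  simp only [pvGridCells, List.mem_flatMap, List.mem_map, PySem.List.mem_pyRange_one,
    pvInGrid, Bool.and_eq_true, decide_eq_true_eq]
  constructor
  · rintro ⟨r, hr, c, hc, rfl⟩
    exact ⟨⟨⟨hr.1, hr.2⟩, hc.1⟩, hc.2⟩
  · rintro ⟨⟨⟨h1, h2⟩, h3⟩, h4⟩
    exact ⟨p.1, ⟨h1, h2⟩, p.2, ⟨h3, h4⟩, Prod.mk.eta⟩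

-- ===== PORT A =====
def pvBfsLoop (array : List (List Int)) (target n : Int)
    (visited : Int × Int → Bool) (queue acc : List (Int × Int)) :
    List (Int × Int) × (Int × Int → Bool) :=
  if hg : ∀ q ∈ queue, pvInGrid n q = true then
    match queue with
    | [] => (acc, visited)
    | p :: rest =>
      let visited' : Int × Int → Bool := fun q => if q = p then true else visited q
      let added := pvMoves.filterMap (fun m =>
        if pvInGrid n (p.1 + m.1, p.2 + m.2) && !visited' (p.1 + m.1, p.2 + m.2) &&
           (pvAt array (p.1 + m.1) (p.2 + m.2) == target)
        then some (p.1 + m.1, p.2 + m.2) else none)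
      pvBfsLoop array target n visited' (rest ++ added) (acc ++ [p])
  else (acc, visited)
termination_by ((pvGridCells n).countP (fun q => !visited q), queue.countP (fun q => visited q))
decreasing_by
  by_cases hv : visited p = true
  · apply Prod.Lex.right'
    · apply pv_countP_mono
      intro x _ hfx
      simp only [visited', Bool.not_eq_true'] at hfx ⊢
      by_cases hxp : x = p
      · simp [hxp] at hfx
      · simpa [hxp] using hfx
    · have h2 : added.countP (fun q => visited' q) = 0 := by
        rw [List.countP_eq_zero]
        intro q hq
        simp only [added, List.mem_filterMap] at hq
        obtain ⟨m, -, hm⟩ := hq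
        split at hm
        · next hcc =>
            obtain ⟨⟨-, hnv⟩, -⟩ := by simpa [Bool.and_eq_true] using hcc
            cases hm
            simpa using hnv
        · simp at hm
      have h3 : rest.countP (fun q => visited' q) = rest.countP (fun q => visited q) := by
        apply List.countP_congr
        intro x _
        simp only [visited']
        by_cases hxp : x = p
        · simp [hxp, hv]
        · simp [hxp]
      have h4 : (p :: rest).countP (fun q => visited q) = rest.countP (fun q => visited q) + 1 := by
        simp [hv]
      rw [List.countP_append, h2, h3, h4]
      omega
  · apply Prod.Lex.left
    have hpmem : p ∈ pvGridCells n := (pv_mem_gridCells n p).mpr (hg p List.mem_cons_self)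
    apply pv_countP_lt _ _ _ p hpmem
    · intro x _ hx
      simp only [visited', Bool.not_eq_true'] at hx ⊢
      by_cases hxp : x = p
      · simp [hxp] at hx
      · simpa [hxp] using hx
    · simpa using hv
    · simp [visited']

def pvStd (empty_block : List (Int × Int)) : List (List Int) :=
  let min_row := ((PySem.List.min? empty_block (fun x => x.1)).getD (0,0)).1
  let min_col := ((PySem.List.min? empty_block (fun x => x.2)).getD (0,0)).2
  let max_row_size := ((PySem.List.max? empty_block (fun x => x.1)).getD (0,0)).1 - min_row + 1
  let max_col_size := ((PySem.List.max? empty_block (fun x => x.2)).getD (0,0)).2 - min_col + 1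
  let standard_N := max max_row_size max_col_size
  let board0 := (PySem.List.pyRange 0 standard_N 1).map
    (fun _ => (PySem.List.pyRange 0 standard_N 1).map (fun _ => (0:Int)))
  empty_block.foldl (fun board p =>
    PySem.List.pySetD board (p.1 - min_row)
      (PySem.List.pySetD (PySem.List.pyGetD board (p.1 - min_row) []) (p.2 - min_col) 1)) board0

def get_target_blocks (array : List (List Int)) (target : Int) : List (List (List Int)) :=
  let n := PySem.List.len array
  (((PySem.List.pyRange 0 n 1).foldl (fun st row =>
    (PySem.List.pyRange 0 n 1).foldl (fun (st : ((Int × Int) → Bool) × List (List (List Int))) col =>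
      if !st.1 (row, col) && (pvAt array row col == target) then
        let res := pvBfsLoop array target n st.1 [(row, col)] []
        (res.2, st.2 ++ [pvStd res.1])
      else st) st) (fun _ => false, [])) : ((Int × Int) → Bool) × List (List (List Int))).2

-- ===== PORT B =====
-- one raster-scan step of the labeling pass: state = (label dict, members dict, next id)
def pvLabelStep (array : List (List Int)) (target : Int) (r : Int)
    (st : PySem.Dict (Int × Int) Int × PySem.Dict Int (List (Int × Int)) × Int) (c : Int) :
    PySem.Dict (Int × Int) Int × PySem.Dict Int (List (Int × Int)) × Int :=
  if pvAt array r c == target then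
    let lu := st.1.get? (r - 1, c)
    let ll := st.1.get? (r, c - 1)
    let t : Int × PySem.Dict (Int × Int) Int × PySem.Dict Int (List (Int × Int)) × Int :=
      match lu, ll with
      | none, none => (st.2.2, st.1, st.2.1.insert st.2.2 [], st.2.2 + 1)
      | none, some l2 => (l2, st.1, st.2.1, st.2.2)
      | some l1, none => (l1, st.1, st.2.1, st.2.2)
      | some l1, some l2 =>
        if l1 == l2 then (l1, st.1, st.2.1, st.2.2)
        else
          -- members[l2] is present: l2 is the label of the left neighbour
          let dropped := (st.2.1.get? l2).getD []
          (l1, dropped.foldl (fun d cell => d.insert cell l1) st.1,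
            ((st.2.1.modify l1 [] (fun lst => lst ++ dropped)).erase l2), st.2.2)
    (t.2.1.insert (r, c) t.1, t.2.2.1.modify t.1 [] (fun lst => lst ++ [(r, c)]), t.2.2.2)
  else st

-- normalized 0/1 board of one component (membership comprehension, min/max of coordinates)
def pvStdB (comp : List (Int × Int)) : List (List Int) :=
  let rs := comp.map (fun p => p.1)
  let cs := comp.map (fun p => p.2)
  let mr := (PySem.List.min? rs (fun x => x)).getD 0
  let mc := (PySem.List.min? cs (fun x => x)).getD 0
  let k := max ((PySem.List.max? rs (fun x => x)).getD 0 - mr)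
               ((PySem.List.max? cs (fun x => x)).getD 0 - mc) + 1
  let cells := PySem.Set.ofList comp
  (PySem.List.pyRange 0 k 1).map (fun i => (PySem.List.pyRange 0 k 1).map (fun j =>
    if PySem.Set.contains cells (mr + i, mc + j) then (1:Int) else 0))

-- one step of the emission pass; label[(r,c)] and members[lab] are present whenever read,
-- so Python's d[k] is ported as (get? …).getD
def pvEmitStep (array : List (List Int)) (target : Int)
    (label : PySem.Dict (Int × Int) Int) (members : PySem.Dict Int (List (Int × Int)))
    (r : Int) (st : PySem.Set Int × List (List (List Int))) (c : Int) :
    PySem.Set Int × List (List (List Int)) :=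
  if pvAt array r c == target then
    let lab := (label.get? (r, c)).getD 0
    if PySem.Set.contains st.1 lab then st
    else (PySem.Set.add st.1 lab, st.2 ++ [pvStdB ((members.get? lab).getD [])])
  else st

-- the labeling raster scan (first pass of B)
def pvLabelScan (array : List (List Int)) (target n : Int) :
    PySem.Dict (Int × Int) Int × PySem.Dict Int (List (Int × Int)) × Int :=
  (PySem.List.pyRange 0 n 1).foldl (fun st r =>
      (PySem.List.pyRange 0 n 1).foldl (pvLabelStep array target r) st)
    (PySem.Dict.empty, PySem.Dict.empty, 0)

-- the emission raster scan (second pass of B)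
def pvEmitScan (array : List (List Int)) (target : Int)
    (label : PySem.Dict (Int × Int) Int) (members : PySem.Dict Int (List (Int × Int)))
    (n : Int) : PySem.Set Int × List (List (List Int)) :=
  (PySem.List.pyRange 0 n 1).foldl (fun st r =>
      (PySem.List.pyRange 0 n 1).foldl (pvEmitStep array target label members r) st)
    (PySem.Set.empty, [])

def get_target_blocks_alt (array : List (List Int)) (target : Int) : List (List (List Int)) :=
  let n := PySem.List.len array
  let lm := pvLabelScan array target n
  (pvEmitScan array target lm.1 lm.2.1 n).2

-- ===== PRECONDITION & SPEC =====
-- Pre_ excludes exactly the inputs on which Python A raises IndexError: some row of the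
-- square board is shorter than len(array), so a cell access array[r][c] with c < len(array)
-- goes out of range.
def Pre_get_target_blocks (array : List (List Int)) (target : Int) : Prop :=
  ∀ row ∈ array, array.length ≤ row.length
instance (array : List (List Int)) (target : Int) : Decidable (Pre_get_target_blocks array target) := by unfold Pre_get_target_blocks; infer_instance

def pvWitness_get_target_blocks : List (List Int) × Int := ([[1, 0], [0, 1]], 1)

def Spec_get_target_blocks (array : List (List Int)) (target : Int) (out : List (List (List Int))) : Prop := out = get_target_blocks_alt array target
instance (array : List (List Int)) (target : Int) (out : List (List (List Int))) : Decidable (Spec_get_target_blocks array target out) := by unfold Spec_get_target_blocks; infer_instance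

-- ===== CLAIM (what is proved, stated in full; the proofs are below) =====
def Claim_equal_get_target_blocks : Prop := ∀ (array : List (List Int)) (target : Int), Dom_get_target_blocks array target → Pre_get_target_blocks array target → Spec_get_target_blocks array target (get_target_blocks array target)

-- ===== LEMMAS AND PROOFS =====
-- ===== proof-side notions =====
def pvNbrs (p : Int × Int) : List (Int × Int) :=
  [(p.1 + 1, p.2), (p.1, p.2 + 1), (p.1 - 1, p.2), (p.1, p.2 - 1)]

def pvTc (array : List (List Int)) (target n : Int) (p : Int × Int) : Prop :=
  pvInGrid n p = true ∧ pvAt array p.1 p.2 = target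

def pvAdj (array : List (List Int)) (target n : Int) (p q : Int × Int) : Prop :=
  pvTc array target n p ∧ pvTc array target n q ∧ q ∈ pvNbrs p

def pvReach (array : List (List Int)) (target n : Int) (s p : Int × Int) : Prop :=
  Relation.ReflTransGen (pvAdj array target n) s p

def pvClosed (array : List (List Int)) (target n : Int) (V : Int × Int → Prop) : Prop :=
  ∀ p q, V p → pvAdj array target n p q → V q

theorem pv_nbrs_symm (p q : Int × Int) : q ∈ pvNbrs p ↔ p ∈ pvNbrs q := by
  simp only [pvNbrs, List.mem_cons, List.not_mem_nil, or_false, Prod.ext_iff]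
  omega

theorem pv_adj_symm {array : List (List Int)} {target n : Int} {p q : Int × Int}
    (h : pvAdj array target n p q) : pvAdj array target n q p :=
  ⟨h.2.1, h.1, (pv_nbrs_symm q p).mpr h.2.2⟩

theorem pv_reach_tc {array : List (List Int)} {target n : Int} {s p : Int × Int}
    (hs : pvTc array target n s) (h : pvReach array target n s p) :
    pvTc array target n p := by
  induction h with
  | refl => exact hs
  | tail _ hadj _ => exact hadj.2.1

theorem pv_reach_symm {array : List (List Int)} {target n : Int} {s p : Int × Int}
    (h : pvReach array target n s p) : pvReach array target n p s :=
  Relation.ReflTransGen.symmetric (fun _ _ hadj => pv_adj_symm hadj) h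

theorem pv_escape {array : List (List Int)} {target n : Int} {s : Int × Int}
    (V : Int × Int → Prop)
    (hcl : pvClosed array target n V) (hs : ¬ V s) {p : Int × Int}
    (h : pvReach array target n s p) : ¬ V p := by
  induction h with
  | refl => exact hs
  | tail _ hadj ih =>
    intro hVc
    exact ih (hcl _ _ hVc (pv_adj_symm hadj))

theorem pv_reach_tail {array : List (List Int)} {target n : Int} {s p q : Int × Int}
    (h : pvReach array target n s p) (hadj : pvAdj array target n p q) :
    pvReach array target n s q :=
  Relation.ReflTransGen.tail h hadj

theorem pvBfsLoop_spec (array : List (List Int)) (target n : Int) (s : Int × Int)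
    (vis0 : Int × Int → Bool)
    (hs : pvTc array target n s) :
    ∀ (visited : Int × Int → Bool) (queue acc : List (Int × Int)),
    (∀ q ∈ queue, pvReach array target n s q) →
    (∀ p ∈ acc, pvReach array target n s p) →
    (∀ x, visited x = true ↔ vis0 x = true ∨ x ∈ acc) →
    (∀ p ∈ acc, ∀ q, pvAdj array target n p q → visited q = true ∨ q ∈ queue) →
    (∀ p ∈ acc, p ∈ (pvBfsLoop array target n visited queue acc).1) ∧
    (∀ q ∈ queue, q ∈ (pvBfsLoop array target n visited queue acc).1) ∧
    (∀ p ∈ (pvBfsLoop array target n visited queue acc).1, pvReach array target n s p) ∧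
    (∀ x, (pvBfsLoop array target n visited queue acc).2 x = true ↔
        vis0 x = true ∨ x ∈ (pvBfsLoop array target n visited queue acc).1) ∧
    (∀ p ∈ (pvBfsLoop array target n visited queue acc).1, ∀ q,
        pvAdj array target n p q → (pvBfsLoop array target n visited queue acc).2 q = true) := by
  intro visited queue acc
  induction visited, queue, acc using pvBfsLoop.induct array target n with
  | case1 visited acc hgq =>
    intro I1 I2 I3 I4
    rw [pvBfsLoop]
    simp only [dif_pos hgq]
    refine ⟨fun p hp => hp, by simp, I2, I3, ?_⟩
    · intro p hp q hadj
      rcases I4 p hp q hadj with h | h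
      · exact h
      · simp at h
  | case2 visited acc p rest hgq visited' added IH =>
    intro I1 I2 I3 I4
    try simp only [dite_eq_ite] at IH
    rw [pvBfsLoop]
    simp only [dif_pos hgq]
    have hpreach : pvReach array target n s p := I1 p List.mem_cons_self
    have hptc : pvTc array target n p := pv_reach_tc hs hpreach
    have hvis' : ∀ x, visited' x = true ↔ x = p ∨ visited x = true := by
      intro x
      simp only [visited']
      by_cases h : x = p <;> simp [h]
    have hadded : ∀ q, q ∈ added ↔
        (q ∈ pvNbrs p ∧ pvInGrid n q = true ∧ visited' q = false ∧
          pvAt array q.1 q.2 = target) := by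
      intro q
      simp only [added, List.mem_filterMap, pvMoves, List.mem_cons, List.not_mem_nil, or_false]
      constructor
      · rintro ⟨m, hm, hsome⟩
        have hcases : m = ((1:Int),(0:Int)) ∨ m = ((0:Int),(1:Int)) ∨ m = ((-1:Int),(0:Int)) ∨ m = ((0:Int),(-1:Int)) := by
          tauto
        clear hm
        split at hsome
        next hcc =>
          obtain ⟨⟨hg, hnv⟩, ht⟩ : (pvInGrid n (p.1+m.1, p.2+m.2) = true ∧
              visited' (p.1+m.1, p.2+m.2) = false) ∧ pvAt array (p.1+m.1) (p.2+m.2) = target := by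
            simpa [Bool.and_eq_true] using hcc
          cases hsome
          refine ⟨?_, hg, hnv, ht⟩
          rcases hcases with rfl | rfl | rfl | rfl <;>
            simp [pvNbrs, Prod.ext_iff] <;> omega
        next => simp at hsome
      · rintro ⟨hnb, hg, hnv, ht⟩
        simp only [pvNbrs, List.mem_cons, List.not_mem_nil, or_false] at hnb
        rcases hnb with rfl | rfl | rfl | rfl
        · refine ⟨(1,0), Or.inl rfl, ?_⟩
          rw [dif_pos]
          · simp
          · simp only [Bool.and_eq_true]
            constructor
            · constructor
              · simpa using hg
              · simpa using hnv
            · simpa using ht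
        · refine ⟨(0,1), Or.inr (Or.inl rfl), ?_⟩
          rw [dif_pos]
          · simp
          · simp only [Bool.and_eq_true]
            constructor
            · constructor
              · simpa using hg
              · simpa using hnv
            · simpa using ht
        · refine ⟨(-1,0), Or.inr (Or.inr (Or.inl rfl)), ?_⟩
          rw [dif_pos]
          · simp [Prod.ext_iff]
            constructor <;> omega
          · simp only [Bool.and_eq_true]
            constructor
            · constructor
              · simpa using hg
              · simpa using hnv
            · simpa using ht
        · refine ⟨(0,-1), Or.inr (Or.inr (Or.inr rfl)), ?_⟩
          rw [dif_pos]
          · simp [Prod.ext_iff]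
            constructor <;> omega
          · simp only [Bool.and_eq_true]
            constructor
            · constructor
              · simpa using hg
              · simpa using hnv
            · simpa using ht
    have I1' : ∀ q ∈ rest ++ added, pvReach array target n s q := by
      intro q hq
      rcases List.mem_append.mp hq with h | h
      · exact I1 q (List.mem_cons_of_mem _ h)
      · obtain ⟨hnb, hg, -, ht⟩ := (hadded q).mp h
        exact pv_reach_tail hpreach ⟨hptc, ⟨hg, ht⟩, hnb⟩
    have I2' : ∀ x ∈ acc ++ [p], pvReach array target n s x := by
      intro x hx
      rcases List.mem_append.mp hx with h | h
      · exact I2 x h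
      · rw [List.mem_singleton] at h
        exact h ▸ hpreach
    have I3' : ∀ x, visited' x = true ↔ vis0 x = true ∨ x ∈ acc ++ [p] := by
      intro x
      rw [hvis' x]
      constructor
      · rintro (rfl | h)
        · exact Or.inr (List.mem_append.mpr (Or.inr (List.mem_singleton_self _)))
        · rcases (I3 x).mp h with h' | h'
          · exact Or.inl h'
          · exact Or.inr (List.mem_append.mpr (Or.inl h'))
      · rintro (h | h)
        · exact Or.inr ((I3 x).mpr (Or.inl h))
        · rcases List.mem_append.mp h with h' | h'
          · exact Or.inr ((I3 x).mpr (Or.inr h'))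
          · rw [List.mem_singleton] at h'
            exact Or.inl h'
    have I4' : ∀ x ∈ acc ++ [p], ∀ q, pvAdj array target n x q →
        visited' q = true ∨ q ∈ rest ++ added := by
      intro x hx q hadj
      rcases List.mem_append.mp hx with h | h
      · rcases I4 x h q hadj with h' | h'
        · exact Or.inl ((hvis' q).mpr (Or.inr h'))
        · rcases List.mem_cons.mp h' with rfl | h''
          · exact Or.inl ((hvis' q).mpr (Or.inl rfl))
          · exact Or.inr (List.mem_append.mpr (Or.inl h''))
      · rw [List.mem_singleton] at h
        subst h
        by_cases hv : visited' q = true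
        · exact Or.inl hv
        · refine Or.inr (List.mem_append.mpr (Or.inr ((hadded q).mpr
            ⟨hadj.2.2, hadj.2.1.1, ?_, hadj.2.1.2⟩)))
          exact Bool.not_eq_true _ ▸ (Bool.eq_false_iff.mpr hv)
    obtain ⟨C1, C2, C3, C4, C5⟩ := IH I1' I2' I3' I4'
    refine ⟨?_, ?_, C3, C4, C5⟩
    · intro x hx
      exact C1 x (List.mem_append.mpr (Or.inl hx))
    · intro q hq
      rcases List.mem_cons.mp hq with rfl | h
      · exact C1 q (List.mem_append.mpr (Or.inr (List.mem_singleton_self _)))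
      · exact C2 q (List.mem_append.mpr (Or.inl h))
  | case3 visited queue acc hgq =>
    intro I1 I2 I3 I4
    exfalso
    apply hgq
    intro q hq
    exact (pv_reach_tc hs (I1 q hq)).1

theorem pvBfs_correct (array : List (List Int)) (target n : Int) (s : Int × Int)
    (vis0 : Int × Int → Bool) (hs : pvTc array target n s) (hs0 : vis0 s = false)
    (hcl : pvClosed array target n (fun p => vis0 p = true)) :
    (∀ p, p ∈ (pvBfsLoop array target n vis0 [s] []).1 ↔ pvReach array target n s p) ∧
    (∀ x, (pvBfsLoop array target n vis0 [s] []).2 x = true ↔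
        (vis0 x = true ∨ pvReach array target n s x)) := by
  obtain ⟨C1, C2, C3, C4, C5⟩ := pvBfsLoop_spec array target n s vis0 hs vis0 [s] []
    (by
      intro q hq
      rw [List.mem_singleton] at hq
      exact hq ▸ Relation.ReflTransGen.refl)
    (by simp)
    (by intro x; simp)
    (by simp)
  have hcompl : ∀ p, pvReach array target n s p →
      p ∈ (pvBfsLoop array target n vis0 [s] []).1 := by
    intro p hp
    induction hp with
    | refl => exact C2 s (List.mem_singleton_self _)
    | tail hr hadj ih =>
      rcases (C4 _).mp (C5 _ ih _ hadj) with h | h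
      · exact absurd h (by
          have := pv_escape (fun x => vis0 x = true) hcl (by simp [hs0])
            (pv_reach_tail hr hadj)
          simpa using this)
      · exact h
  refine ⟨fun p => ⟨C3 p, hcompl p⟩, fun x => ?_⟩
  rw [C4 x]
  constructor
  · rintro (h | h)
    · exact Or.inl h
    · exact Or.inr (C3 x h)
  · rintro (h | h)
    · exact Or.inl h
    · exact Or.inr (hcompl x h)

theorem pv_getD_set {α : Type} (l : List α) (n m : Nat) (a d : α) (hm : m < l.length) :
    (l.set n a).getD m d = if n = m then a else l.getD m d := by
  rw [List.getD_eq_getElem _ d (by simpa using hm), List.getD_eq_getElem _ d hm, List.getElem_set]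

theorem pv_writes_spec (mr mc : Int) (N : Nat) :
    ∀ (l : List (Int × Int)) (b : List (List Int)),
    b.length = N → (∀ row ∈ b, row.length = N) →
    (∀ p ∈ l, 0 ≤ p.1 - mr ∧ p.1 - mr < (N:Int) ∧ 0 ≤ p.2 - mc ∧ p.2 - mc < (N:Int)) →
    ((l.foldl (fun board p =>
        PySem.List.pySetD board (p.1 - mr)
          (PySem.List.pySetD (PySem.List.pyGetD board (p.1 - mr) []) (p.2 - mc) 1)) b).length = N ∧
     (∀ row ∈ l.foldl (fun board p =>
        PySem.List.pySetD board (p.1 - mr)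
          (PySem.List.pySetD (PySem.List.pyGetD board (p.1 - mr) []) (p.2 - mc) 1)) b, row.length = N) ∧
     (∀ i j : Nat, i < N → j < N →
       ((l.foldl (fun board p =>
          PySem.List.pySetD board (p.1 - mr)
            (PySem.List.pySetD (PySem.List.pyGetD board (p.1 - mr) []) (p.2 - mc) 1)) b).getD i []).getD j 0 =
        if ∃ p ∈ l, p.1 - mr = (i:Int) ∧ p.2 - mc = (j:Int) then 1
        else (b.getD i []).getD j 0)) := by
  intro l
  induction l with
  | nil =>
    intro b hb hrow _
    refine ⟨hb, hrow, ?_⟩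
    intro i j _ _
    simp
  | cons p t ih =>
    intro b hb hrow hoff
    obtain ⟨h1, h2, h3, h4⟩ := hoff p List.mem_cons_self
    set r : Nat := (p.1 - mr).toNat with hr
    set c : Nat := (p.2 - mc).toNat with hc
    have hrN : r < N := by omega
    have hcN : c < N := by omega
    have hwrite : (PySem.List.pySetD b (p.1 - mr)
        (PySem.List.pySetD (PySem.List.pyGetD b (p.1 - mr) []) (p.2 - mc) 1))
        = b.set r ((b.getD r []).set c 1) := by
      have e1 : p.1 - mr = ((r : Nat) : Int) := by omega
      have e2 : p.2 - mc = ((c : Nat) : Int) := by omega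
      rw [e1, e2, PySem.List.pyGetD_natCast, PySem.List.pySetD_natCast, PySem.List.pySetD_natCast]
    have hb' : (b.set r ((b.getD r []).set c 1)).length = N := by simp [hb]
    have hrow' : ∀ row ∈ b.set r ((b.getD r []).set c 1), row.length = N := by
      intro row hmem
      rcases List.mem_or_eq_of_mem_set hmem with h | h
      · exact hrow row h
      · subst h
        rw [List.length_set]
        have : b.getD r [] = b[r] := List.getD_eq_getElem b [] (by omega)
        rw [this]
        exact hrow _ (List.getElem_mem _)
    have hoff' : ∀ q ∈ t, 0 ≤ q.1 - mr ∧ q.1 - mr < (N:Int) ∧ 0 ≤ q.2 - mc ∧ q.2 - mc < (N:Int) :=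
      fun q hq => hoff q (List.mem_cons_of_mem _ hq)
    obtain ⟨L1, L2, L3⟩ := ih (b.set r ((b.getD r []).set c 1)) hb' hrow' hoff'
    rw [List.foldl_cons, hwrite]
    refine ⟨L1, L2, ?_⟩
    intro i j hi hj
    rw [L3 i j hi hj]
    have hbilen : i < b.length := by omega
    have hrowlen : (b.getD r []).length = N := by
      rw [List.getD_eq_getElem b [] (by omega)]
      exact hrow _ (List.getElem_mem _)
    rw [pv_getD_set b r i _ [] hbilen]
    by_cases ht : ∃ q ∈ t, q.1 - mr = (i:Int) ∧ q.2 - mc = (j:Int)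
    · rw [if_pos ht, if_pos (let ⟨q, hq1, hq2⟩ := ht;
        ⟨q, List.mem_cons_of_mem _ hq1, hq2⟩)]
    · rw [if_neg ht]
      by_cases hri : r = i
      · rw [if_pos hri]
        rw [pv_getD_set (b.getD r []) c j 1 0 (by omega)]
        by_cases hcj : c = j
        · rw [if_pos hcj, if_pos ⟨p, List.mem_cons_self, by omega⟩]
        · rw [if_neg hcj, if_neg ?_, hri]
          rintro ⟨q, hq1, hq2⟩
          rcases List.mem_cons.mp hq1 with rfl | hq3
          · omega
          · exact ht ⟨q, hq3, hq2⟩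
      · rw [if_neg hri, if_neg ?_]
        rintro ⟨q, hq1, hq2⟩
        rcases List.mem_cons.mp hq1 with rfl | hq3
        · omega
        · exact ht ⟨q, hq3, hq2⟩

theorem pvStd_eq_pvStdB (blk comp : List (Int × Int)) (w : Int × Int)
    (hw : w ∈ blk) (hmem : ∀ p, p ∈ blk ↔ p ∈ comp) : pvStd blk = pvStdB comp := by
  have hbne : blk ≠ [] := fun h => by simp [h] at hw
  obtain ⟨aR, haR⟩ : ∃ a, PySem.List.min? blk (fun x => x.1) = some a := by
    cases h : PySem.List.min? blk (fun x => x.1) with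
    | none => exact absurd ((PySem.List.min?_eq_none_iff _ _).mp h) hbne
    | some a => exact ⟨a, rfl⟩
  obtain ⟨aC, haC⟩ : ∃ a, PySem.List.min? blk (fun x => x.2) = some a := by
    cases h : PySem.List.min? blk (fun x => x.2) with
    | none => exact absurd ((PySem.List.min?_eq_none_iff _ _).mp h) hbne
    | some a => exact ⟨a, rfl⟩
  obtain ⟨bR, hbR⟩ : ∃ a, PySem.List.max? blk (fun x => x.1) = some a := by
    cases h : PySem.List.max? blk (fun x => x.1) with
    | none => exact absurd ((PySem.List.max?_eq_none_iff _ _).mp h) hbne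
    | some a => exact ⟨a, rfl⟩
  obtain ⟨bC, hbC⟩ : ∃ a, PySem.List.max? blk (fun x => x.2) = some a := by
    cases h : PySem.List.max? blk (fun x => x.2) with
    | none => exact absurd ((PySem.List.max?_eq_none_iff _ _).mp h) hbne
    | some a => exact ⟨a, rfl⟩
  have hcne : comp.map (fun p => p.1) ≠ [] := by
    simp only [ne_eq, List.map_eq_nil_iff]
    intro h
    rw [h] at hmem
    simp [hmem w] at hw
  have hcne2 : comp.map (fun p => p.2) ≠ [] := by
    simp only [ne_eq, List.map_eq_nil_iff]
    intro h
    rw [h] at hmem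
    simp [hmem w] at hw
  obtain ⟨mR, hmR⟩ : ∃ a, PySem.List.min? (comp.map (fun p => p.1)) (fun x => x) = some a := by
    cases h : PySem.List.min? (comp.map (fun p => p.1)) (fun x => x) with
    | none => exact absurd ((PySem.List.min?_eq_none_iff _ _).mp h) hcne
    | some a => exact ⟨a, rfl⟩
  obtain ⟨mC, hmC⟩ : ∃ a, PySem.List.min? (comp.map (fun p => p.2)) (fun x => x) = some a := by
    cases h : PySem.List.min? (comp.map (fun p => p.2)) (fun x => x) with
    | none => exact absurd ((PySem.List.min?_eq_none_iff _ _).mp h) hcne2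
    | some a => exact ⟨a, rfl⟩
  obtain ⟨xR, hxR⟩ : ∃ a, PySem.List.max? (comp.map (fun p => p.1)) (fun x => x) = some a := by
    cases h : PySem.List.max? (comp.map (fun p => p.1)) (fun x => x) with
    | none => exact absurd ((PySem.List.max?_eq_none_iff _ _).mp h) hcne
    | some a => exact ⟨a, rfl⟩
  obtain ⟨xC, hxC⟩ : ∃ a, PySem.List.max? (comp.map (fun p => p.2)) (fun x => x) = some a := by
    cases h : PySem.List.max? (comp.map (fun p => p.2)) (fun x => x) with
    | none => exact absurd ((PySem.List.max?_eq_none_iff _ _).mp h) hcne2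
    | some a => exact ⟨a, rfl⟩
  have eR : aR.1 = mR := by
    apply le_antisymm
    · obtain ⟨q, hq, hq2⟩ := List.mem_map.mp (PySem.List.min?_mem hmR)
      calc aR.1 ≤ q.1 := PySem.List.min?_isMin haR q ((hmem q).mpr hq)
        _ = mR := hq2
    · exact PySem.List.min?_isMin hmR aR.1
        (List.mem_map.mpr ⟨aR, (hmem aR).mp (PySem.List.min?_mem haR), rfl⟩)
  have eC : aC.2 = mC := by
    apply le_antisymm
    · obtain ⟨q, hq, hq2⟩ := List.mem_map.mp (PySem.List.min?_mem hmC)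
      calc aC.2 ≤ q.2 := PySem.List.min?_isMin haC q ((hmem q).mpr hq)
        _ = mC := hq2
    · exact PySem.List.min?_isMin hmC aC.2
        (List.mem_map.mpr ⟨aC, (hmem aC).mp (PySem.List.min?_mem haC), rfl⟩)
  have eXR : bR.1 = xR := by
    apply le_antisymm
    · exact PySem.List.max?_isMax hxR bR.1
        (List.mem_map.mpr ⟨bR, (hmem bR).mp (PySem.List.max?_mem hbR), rfl⟩)
    · obtain ⟨q, hq, hq2⟩ := List.mem_map.mp (PySem.List.max?_mem hxR)
      calc xR = q.1 := hq2.symm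
        _ ≤ bR.1 := PySem.List.max?_isMax hbR q ((hmem q).mpr hq)
  have eXC : bC.2 = xC := by
    apply le_antisymm
    · exact PySem.List.max?_isMax hxC bC.2
        (List.mem_map.mpr ⟨bC, (hmem bC).mp (PySem.List.max?_mem hbC), rfl⟩)
    · obtain ⟨q, hq, hq2⟩ := List.mem_map.mp (PySem.List.max?_mem hxC)
      calc xC = q.2 := hq2.symm
        _ ≤ bC.2 := PySem.List.max?_isMax hbC q ((hmem q).mpr hq)
  have hMRle : ∀ p ∈ blk, aR.1 ≤ p.1 := fun p hp => PySem.List.min?_isMin haR p hp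
  have hMCle : ∀ p ∈ blk, aC.2 ≤ p.2 := fun p hp => PySem.List.min?_isMin haC p hp
  have hXRge : ∀ p ∈ blk, p.1 ≤ bR.1 := fun p hp => PySem.List.max?_isMax hbR p hp
  have hXCge : ∀ p ∈ blk, p.2 ≤ bC.2 := fun p hp => PySem.List.max?_isMax hbC p hp
  simp only [pvStd, pvStdB, haR, haC, hbR, hbC, hmR, hmC, hxR, hxC, Option.getD_some]
  rw [← eR, ← eC, ← eXR, ← eXC]
  have hKK : max (bR.1 - aR.1 + 1) (bC.2 - aC.2 + 1) = max (bR.1 - aR.1) (bC.2 - aC.2) + 1 := by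
    omega
  rw [hKK]
  set K : Int := max (bR.1 - aR.1) (bC.2 - aC.2) + 1 with hKdef
  have hK1 : 1 ≤ K := by
    have := hMRle w hw
    have := hXRge w hw
    have := hMCle w hw
    have := hXCge w hw
    omega
  have hKN : ((K.toNat : Nat) : Int) = K := Int.toNat_of_nonneg (by omega)
  have hlen0 : ((PySem.List.pyRange 0 K 1).map
      (fun _ => (PySem.List.pyRange 0 K 1).map (fun _ => (0:Int)))).length = K.toNat := by
    simp [PySem.List.length_pyRange_one]
  have hrow0 : ∀ row ∈ (PySem.List.pyRange 0 K 1).map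
      (fun _ => (PySem.List.pyRange 0 K 1).map (fun _ => (0:Int))), row.length = K.toNat := by
    intro row hrow
    obtain ⟨-, -, rfl⟩ := List.mem_map.mp hrow
    simp [PySem.List.length_pyRange_one]
  have hoff : ∀ p ∈ blk, 0 ≤ p.1 - aR.1 ∧ p.1 - aR.1 < ((K.toNat : Nat) : Int) ∧
      0 ≤ p.2 - aC.2 ∧ p.2 - aC.2 < ((K.toNat : Nat) : Int) := by
    intro p hp
    have := hMRle p hp
    have := hXRge p hp
    have := hMCle p hp
    have := hXCge p hp
    rw [hKN]
    omega
  obtain ⟨S1, S2, S3⟩ := pv_writes_spec aR.1 aC.2 K.toNat blk _ hlen0 hrow0 hoff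
  apply List.ext_getElem
  · rw [S1]
    simp [PySem.List.length_pyRange_one]
  · intro i hi1 hi2
    have hiN : i < K.toNat := by rw [← S1]; exact hi1
    apply List.ext_getElem
    · rw [S2 _ (List.getElem_mem hi1), List.getElem_map]
      simp [PySem.List.length_pyRange_one]
    · intro j hj1 hj2
      have hjN : j < K.toNat := by
        have hl := S2 _ (List.getElem_mem hi1)
        rw [← hl]
        exact hj1
      have hlen0i : i < ((PySem.List.pyRange 0 K 1).map
          (fun _ => (PySem.List.pyRange 0 K 1).map (fun _ => (0:Int)))).length := by
        rw [hlen0]; exact hiN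
      have hj' : j < ((PySem.List.pyRange 0 K 1).map (fun _ => (0:Int))).length := by
        rw [List.length_map, PySem.List.length_pyRange_one]
        omega
      have hb0 : (((PySem.List.pyRange 0 K 1).map
          (fun _ => (PySem.List.pyRange 0 K 1).map (fun _ => (0:Int)))).getD i []).getD j 0
          = (0:Int) := by
        rw [List.getD_eq_getElem _ [] hlen0i, List.getElem_map,
          List.getD_eq_getElem _ 0 hj', List.getElem_map]
      have hS := S3 i j hiN hjN
      rw [hb0] at hS
      rw [List.getD_eq_getElem _ [] hi1] at hS
      rw [List.getD_eq_getElem _ 0 hj1] at hS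
      have hcond : (∃ p ∈ blk, p.1 - aR.1 = (i:Int) ∧ p.2 - aC.2 = (j:Int)) ↔
          (PySem.Set.contains (PySem.Set.ofList comp) (aR.1 + (i:Int), aC.2 + (j:Int)) = true) := by
        rw [PySem.Set.contains_iff, PySem.Set.mem_ofList, ← hmem]
        constructor
        · rintro ⟨p, hp, h1, h2⟩
          have hpe : p = (aR.1 + (i:Int), aC.2 + (j:Int)) := by
            rcases p with ⟨p1, p2⟩
            simp only [Prod.mk.injEq]
            constructor <;> [skip; skip] <;> omega
          exact hpe ▸ hp
        · intro h
          exact ⟨_, h, by simp, by simp⟩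
      simp only [List.getElem_map, PySem.List.getElem_pyRange_one, zero_add]
      rw [hS]
      exact if_congr hcond rfl rfl

-- ===== B-side: connected-component-labeling correctness =====
def pvLexLt (p q : Int × Int) : Prop := p.1 < q.1 ∨ (p.1 = q.1 ∧ p.2 < q.2)

theorem pv_pairwise_pyRange (a b : Int) : (PySem.List.pyRange a b).Pairwise (· < ·) := by
  rw [List.pairwise_iff_getElem]
  intro i j hi hj hij
  rw [PySem.List.getElem_pyRange_one, PySem.List.getElem_pyRange_one]
  omega

theorem pv_pairwise_gridCells (n : Int) : (pvGridCells n).Pairwise pvLexLt := by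
  rw [pvGridCells, List.pairwise_flatMap]
  constructor
  · intro r _
    rw [List.pairwise_map]
    refine (pv_pairwise_pyRange 0 n).imp ?_
    intro c c' h
    exact Or.inr ⟨rfl, h⟩
  · refine (pv_pairwise_pyRange 0 n).imp ?_
    intro r r' h x hx y hy
    simp only [List.mem_map] at hx hy
    obtain ⟨c, -, rfl⟩ := hx
    obtain ⟨c', -, rfl⟩ := hy
    exact Or.inl h

theorem pv_grid_split (n : Int) (done rest : List (Int × Int)) (x : Int × Int)
    (h : pvGridCells n = done ++ x :: rest) :
    pvInGrid n x = true ∧ (∀ q, q ∈ done ↔ (pvInGrid n q = true ∧ pvLexLt q x)) := by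
  have hpw := pv_pairwise_gridCells n
  rw [h] at hpw
  obtain ⟨hpw1, hpw2, hpw3⟩ := List.pairwise_append.mp hpw
  have hx : pvInGrid n x = true := (pv_mem_gridCells n x).mp (by rw [h]; simp)
  refine ⟨hx, fun q => ⟨?_, ?_⟩⟩
  · intro hq
    refine ⟨(pv_mem_gridCells n q).mp (by rw [h]; exact List.mem_append.mpr (Or.inl hq)), ?_⟩
    exact hpw3 q hq x List.mem_cons_self
  · rintro ⟨hg, hlex⟩
    have hmem : q ∈ done ++ x :: rest := by rw [← h]; exact (pv_mem_gridCells n q).mpr hg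
    rcases List.mem_append.mp hmem with h1 | h1
    · exact h1
    · rcases List.mem_cons.mp h1 with rfl | h2
      · exfalso; rcases hlex with h3 | h3 <;> omega
      · have := (List.pairwise_cons.mp hpw2).1 q h2
        exfalso
        rcases hlex with h3 | h3 <;> rcases this with h4 | h4 <;> omega

def pvAdjR (array : List (List Int)) (target n : Int) (V : Int × Int → Prop)
    (p q : Int × Int) : Prop :=
  pvAdj array target n p q ∧ V p ∧ V q

def pvConn (array : List (List Int)) (target n : Int) (V : Int × Int → Prop)
    (p q : Int × Int) : Prop :=
  Relation.ReflTransGen (pvAdjR array target n V) p q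

theorem pv_conn_symm {array : List (List Int)} {target n : Int} {V : Int × Int → Prop}
    {p q : Int × Int} (h : pvConn array target n V p q) : pvConn array target n V q p :=
  Relation.ReflTransGen.symmetric
    (fun _ _ hadj => ⟨pv_adj_symm hadj.1, hadj.2.2, hadj.2.1⟩) h

theorem pv_conn_mono {array : List (List Int)} {target n : Int} {V W : Int × Int → Prop}
    (hVW : ∀ q, V q → W q) {p q : Int × Int}
    (h : pvConn array target n V p q) : pvConn array target n W p q :=
  Relation.ReflTransGen.mono (fun _ _ ha => ⟨ha.1, hVW _ ha.2.1, hVW _ ha.2.2⟩) h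

theorem pv_conn_congr {array : List (List Int)} {target n : Int} {V W : Int × Int → Prop}
    (hVW : ∀ q, V q ↔ W q) (p q : Int × Int) :
    pvConn array target n V p q ↔ pvConn array target n W p q :=
  ⟨pv_conn_mono (fun q h => (hVW q).mp h), pv_conn_mono (fun q h => (hVW q).mpr h)⟩

def pvTouch (array : List (List Int)) (target n : Int) (V : Int × Int → Prop)
    (x p : Int × Int) : Prop :=
  V p ∧ ∃ u, V u ∧ pvAdj array target n x u ∧ pvConn array target n V p u

theorem pv_nbrs_irrefl (x : Int × Int) : x ∉ pvNbrs x := by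
  simp only [pvNbrs, List.mem_cons, List.not_mem_nil, or_false, Prod.ext_iff]
  omega

theorem pv_conn_add (array : List (List Int)) (target n : Int) (V : Int × Int → Prop)
    (x : Int × Int) (hVx : ¬ V x) :
    ∀ p q, pvConn array target n (fun z => V z ∨ z = x) p q →
      p = q ∨ (p = x ∧ pvTouch array target n V x q) ∨
      (pvTouch array target n V x p ∧ q = x) ∨
      (V p ∧ V q ∧ (pvConn array target n V p q ∨
        (pvTouch array target n V x p ∧ pvTouch array target n V x q))) := by
  have hAdjxx : ¬ pvAdj array target n x x := fun h => pv_nbrs_irrefl x h.2.2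
  have hTself : ∀ z, V z → pvAdj array target n x z → pvTouch array target n V x z :=
    fun z hVz ha => ⟨hVz, z, hVz, ha, Relation.ReflTransGen.refl⟩
  have hText : ∀ z w, V z → V w → pvAdj array target n z w →
      pvTouch array target n V x w → pvTouch array target n V x z := by
    rintro z w hVz hVw hzw ⟨-, u, hVu, hxu, hconn⟩
    exact ⟨hVz, u, hVu, hxu, Relation.ReflTransGen.head ⟨hzw, hVz, hVw⟩ hconn⟩
  intro p q h
  induction h with
  | refl => exact Or.inl rfl
  | @tail m q hpm hedge ih =>
    obtain ⟨hadj, hVm', hVq'⟩ := hedge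
    rcases ih with rfl | ⟨hpx, hTm⟩ | ⟨hTp, hmx⟩ | ⟨hVp, hVm, hcase⟩
    · -- trivial path so far: m = p
      by_cases hmx : p = x
      · by_cases hqx : q = x
        · exact Or.inl (hmx.trans hqx.symm)
        · have hVq : V q := hVq'.resolve_right hqx
          have hadj' : pvAdj array target n x q := by rw [← hmx]; exact hadj
          exact Or.inr (Or.inl ⟨hmx, hTself q hVq hadj'⟩)
      · have hVp2 : V p := hVm'.resolve_right hmx
        by_cases hqx : q = x
        · have hadj' : pvAdj array target n x p := by rw [← hqx]; exact pv_adj_symm hadj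
          exact Or.inr (Or.inr (Or.inl ⟨hTself p hVp2 hadj', hqx⟩))
        · have hVq : V q := hVq'.resolve_right hqx
          exact Or.inr (Or.inr (Or.inr ⟨hVp2, hVq,
            Or.inl (Relation.ReflTransGen.single ⟨hadj, hVp2, hVq⟩)⟩))
    · -- hpx : p = x, the path reached m with touch m
      have hVm : V m := hTm.1
      by_cases hqx : q = x
      · exact Or.inl (hpx.trans hqx.symm)
      · have hVq : V q := hVq'.resolve_right hqx
        exact Or.inr (Or.inl ⟨hpx, hText q m hVq hVm (pv_adj_symm hadj) hTm⟩)
    · -- touch p and hmx : m = x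
      by_cases hqx : q = x
      · exact absurd hadj (by rw [hmx, hqx]; exact hAdjxx)
      · have hVq : V q := hVq'.resolve_right hqx
        have hadj' : pvAdj array target n x q := by rw [← hmx]; exact hadj
        exact Or.inr (Or.inr (Or.inr ⟨hTp.1, hVq, Or.inr ⟨hTp, hTself q hVq hadj'⟩⟩))
    · by_cases hqx : q = x
      · refine Or.inr (Or.inr (Or.inl ⟨?_, hqx⟩))
        rcases hcase with hconn | ⟨hTp, hTm⟩
        · exact ⟨hVp, m, hVm, (by rw [← hqx]; exact pv_adj_symm hadj), hconn⟩
        · exact hTp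
      · have hVq : V q := hVq'.resolve_right hqx
        refine Or.inr (Or.inr (Or.inr ⟨hVp, hVq, ?_⟩))
        rcases hcase with hconn | ⟨hTp, hTm⟩
        · exact Or.inl (Relation.ReflTransGen.tail hconn ⟨hadj, hVm, hVq⟩)
        · exact Or.inr ⟨hTp, hText q m hVq hVm (pv_adj_symm hadj) hTm⟩

theorem pv_conn_add_link (array : List (List Int)) (target n : Int) (V : Int × Int → Prop)
    (x : Int × Int) {q : Int × Int}
    (hTq : pvTouch array target n V x q) :
    pvConn array target n (fun z => V z ∨ z = x) x q := by
  obtain ⟨hVq, u, hVu, hxu, hconn⟩ := hTq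
  have h1 : pvConn array target n (fun z => V z ∨ z = x) u q :=
    pv_conn_symm (pv_conn_mono (fun z h => Or.inl h) hconn)
  exact Relation.ReflTransGen.head ⟨hxu, Or.inr rfl, Or.inl hVu⟩ h1

theorem pv_conn_add_old (array : List (List Int)) (target n : Int) (V : Int × Int → Prop)
    (x : Int × Int) (hVx : ¬ V x) {p q : Int × Int} (hVp : V p) (hVq : V q) :
    pvConn array target n (fun z => V z ∨ z = x) p q ↔
      pvConn array target n V p q ∨
        (pvTouch array target n V x p ∧ pvTouch array target n V x q) := by
  constructor
  · intro h
    rcases pv_conn_add array target n V x hVx p q h with rfl | ⟨hpx, -⟩ | ⟨-, hqx⟩ | ⟨-, -, hc⟩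
    · exact Or.inl Relation.ReflTransGen.refl
    · exact absurd (hpx ▸ hVp) hVx
    · exact absurd (hqx ▸ hVq) hVx
    · exact hc
  · rintro (h | ⟨hTp, hTq⟩)
    · exact pv_conn_mono (fun z => Or.inl) h
    · exact Relation.ReflTransGen.trans
        (pv_conn_symm (pv_conn_add_link array target n V x hTp))
        (pv_conn_add_link array target n V x hTq)

theorem pv_conn_add_x (array : List (List Int)) (target n : Int) (V : Int × Int → Prop)
    (x : Int × Int) (hVx : ¬ V x) {q : Int × Int} (hVq : V q) :
    pvConn array target n (fun z => V z ∨ z = x) x q ↔ pvTouch array target n V x q := by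
  constructor
  · intro h
    rcases pv_conn_add array target n V x hVx x q h with heq | ⟨-, hTq⟩ | ⟨hTx, -⟩ | ⟨hVx', -, -⟩
    · rw [← heq] at hVq
      exact absurd hVq hVx
    · exact hTq
    · exact absurd hTx.1 hVx
    · exact absurd hVx' hVx
  · exact pv_conn_add_link array target n V x

def pvInv (array : List (List Int)) (target n : Int) (V : Int × Int → Prop)
    (st : PySem.Dict (Int × Int) Int × PySem.Dict Int (List (Int × Int)) × Int) : Prop :=
  (∀ q, (st.1.get? q).isSome ↔ V q) ∧
  (∀ p q lp lq, st.1.get? p = some lp → st.1.get? q = some lq →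
     (lp = lq ↔ pvConn array target n V p q)) ∧
  (∀ l lst, st.2.1.get? l = some lst → ∀ p, p ∈ lst ↔ st.1.get? p = some l) ∧
  (∀ q l, st.1.get? q = some l → (st.2.1.get? l).isSome) ∧
  (∀ q l, st.1.get? q = some l → l < st.2.2)

theorem pvInv_congr {array : List (List Int)} {target n : Int} {V W : Int × Int → Prop}
    (hVW : ∀ q, V q ↔ W q)
    {st : PySem.Dict (Int × Int) Int × PySem.Dict Int (List (Int × Int)) × Int}
    (h : pvInv array target n V st) : pvInv array target n W st := by
  obtain ⟨h1, h2, h3, h4, h5⟩ := h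
  exact ⟨fun q => (h1 q).trans (hVW q),
    fun p q lp lq hp hq => (h2 p q lp lq hp hq).trans (pv_conn_congr hVW p q), h3, h4, h5⟩

theorem pv_get?_foldl_insert (cells : List (Int × Int)) (v : Int) :
    ∀ (d : PySem.Dict (Int × Int) Int) (q : Int × Int),
    (cells.foldl (fun d cell => d.insert cell v) d).get? q =
      if q ∈ cells then some v else d.get? q := by
  induction cells with
  | nil => intro d q; simp
  | cons c t ih =>
    intro d q
    rw [List.foldl_cons, ih, PySem.Dict.get?_insert]
    by_cases hqc : q = c
    · simp [hqc]
    · by_cases hq : q ∈ t <;> simp [hq, hqc]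

theorem pv_get?_erase (d : PySem.Dict Int (List (Int × Int))) (k q : Int) :
    (d.erase k).get? q = if q = k then none else d.get? q := by
  rcases d with ⟨items⟩
  have h : ∀ (l : List (Int × List (Int × Int))),
      (l.filter (fun p => !(p.1 == k))).find? (fun p => p.1 == q)
        = if q = k then none else l.find? (fun p => p.1 == q) := by
    intro l
    induction l with
    | nil => by_cases h : q = k <;> simp [h]
    | cons p t ih =>
      rw [List.filter_cons]
      by_cases hpk : p.1 = k
      · rw [if_neg (by simp [hpk])]
        rw [ih]
        by_cases hqk : q = k
        · rw [if_pos hqk, if_pos hqk]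
        · rw [if_neg hqk, if_neg hqk]
          have hne : (p.1 == q) = false :=
            beq_eq_false_iff_ne.mpr (fun h' => hqk (by rw [← h', hpk]))
          rw [List.find?_cons, hne]
      · rw [if_pos (by simp [hpk])]
        by_cases hpq : p.1 = q
        · have hqk : ¬ q = k := fun h' => hpk (by rw [hpq, h'])
          have hbq : (p.1 == q) = true := beq_iff_eq.mpr hpq
          rw [if_neg hqk, List.find?_cons, List.find?_cons, hbq]
        · have hbq : (p.1 == q) = false := beq_eq_false_iff_ne.mpr hpq
          rw [List.find?_cons, hbq, ih]
          by_cases hqk : q = k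
          · rw [if_pos hqk, if_pos hqk]
          · rw [if_neg hqk, if_neg hqk, List.find?_cons, hbq]
  simp only [PySem.Dict.erase, PySem.Dict.get?]
  rw [h]
  by_cases hqk : q = k <;> simp [hqk]

-- the fresh-label branch of the scan step preserves the invariant
theorem pv_step_fresh (array : List (List Int)) (target n : Int) (V : Int × Int → Prop)
    (L : PySem.Dict (Int × Int) Int) (M : PySem.Dict Int (List (Int × Int))) (k : Int)
    (x : Int × Int) (hVx : ¬ V x)
    (hinv : pvInv array target n V (L, M, k))
    (hT0 : ∀ p, ¬ pvTouch array target n V x p) :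
    pvInv array target n (fun z => V z ∨ z = x)
      (L.insert x k, (M.insert k []).modify k [] (fun lst => lst ++ [x]), k + 1) := by
  obtain ⟨I1, I2, I3, I4, I5⟩ := hinv
  dsimp only at I1 I2 I3 I4 I5
  have hLx : L.get? x = none := by
    cases h : L.get? x with
    | none => rfl
    | some l => exact absurd ((I1 x).mp (by simp [h])) hVx
  have hL' : ∀ q, (L.insert x k).get? q = if q = x then some k else L.get? q :=
    fun q => PySem.Dict.get?_insert L x q k
  have hM' : ∀ l, ((M.insert k []).modify k [] (fun lst => lst ++ [x])).get? l =
      if l = k then some [x] else M.get? l := by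
    intro l
    simp only [PySem.Dict.modify]
    rw [PySem.Dict.get?_insert]
    by_cases hl : l = k
    · rw [if_pos hl, if_pos hl, PySem.Dict.getD_insert_self]
      simp
    · rw [if_neg hl, if_neg hl, PySem.Dict.get?_insert, if_neg hl]
  refine ⟨?_, ?_, ?_, ?_, ?_⟩ <;> dsimp only
  · intro q
    rw [hL' q]
    by_cases hq : q = x <;> simp [hq, I1 q]
  · intro p q lp lq hp hq
    rw [hL'] at hp hq
    by_cases hpx : p = x <;> by_cases hqx : q = x
    · rw [if_pos hpx] at hp
      rw [if_pos hqx] at hq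
      cases hp; cases hq
      rw [hpx, hqx]
      exact ⟨fun _ => Relation.ReflTransGen.refl, fun _ => rfl⟩
    · rw [if_pos hpx] at hp
      rw [if_neg hqx] at hq
      cases hp
      have hVq : V q := (I1 q).mp (by simp [hq])
      rw [hpx, pv_conn_add_x array target n V x hVx hVq]
      have hlt := I5 q lq hq
      exact ⟨fun h => absurd h (by omega), fun h => absurd h (hT0 q)⟩
    · rw [if_pos hqx] at hq
      rw [if_neg hpx] at hp
      cases hq
      have hVp : V p := (I1 p).mp (by simp [hp])
      have hsy : pvConn array target n (fun z => V z ∨ z = x) p x ↔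
          pvConn array target n (fun z => V z ∨ z = x) x p :=
        ⟨pv_conn_symm, pv_conn_symm⟩
      rw [hqx, hsy, pv_conn_add_x array target n V x hVx hVp]
      have hlt := I5 p lp hp
      exact ⟨fun h => absurd h (by omega), fun h => absurd h (hT0 p)⟩
    · rw [if_neg hpx] at hp
      rw [if_neg hqx] at hq
      have hVp : V p := (I1 p).mp (by simp [hp])
      have hVq : V q := (I1 q).mp (by simp [hq])
      rw [pv_conn_add_old array target n V x hVx hVp hVq,
        ← I2 p q lp lq hp hq]
      constructor
      · exact Or.inl
      · rintro (h | ⟨h, -⟩)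
        · exact h
        · exact absurd h (hT0 p)
  · intro l lst hl
    rw [hM'] at hl
    by_cases hlk : l = k
    · rw [if_pos hlk] at hl
      cases hl
      intro p
      rw [hL']
      by_cases hpx : p = x
      · simp [hpx, hlk]
      · rw [if_neg hpx]
        simp only [List.mem_singleton, hpx, false_iff]
        intro hcon
        have h5 := I5 p l hcon
        omega
    · rw [if_neg hlk] at hl
      intro p
      rw [I3 l lst hl p, hL']
      by_cases hpx : p = x
      · rw [if_pos hpx, hpx, hLx]
        constructor
        · intro hcc
          cases hcc
        · intro hcc
          injection hcc with hcc
          omega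
      · rw [if_neg hpx]
  · intro q l hq
    rw [hL'] at hq
    rw [hM']
    by_cases hqx : q = x
    · rw [if_pos hqx] at hq
      cases hq
      simp
    · rw [if_neg hqx] at hq
      have := I5 q l hq
      rw [if_neg (by omega)]
      exact I4 q l hq
  · intro q l hq
    rw [hL'] at hq
    by_cases hqx : q = x
    · rw [if_pos hqx] at hq
      cases hq
      omega
    · rw [if_neg hqx] at hq
      have := I5 q l hq
      omega

-- the join-with-an-existing-label branch of the scan step preserves the invariant
theorem pv_step_join (array : List (List Int)) (target n : Int) (V : Int × Int → Prop)
    (L : PySem.Dict (Int × Int) Int) (M : PySem.Dict Int (List (Int × Int))) (k : Int)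
    (x : Int × Int) (l0 : Int) (u0 : Int × Int) (hVx : ¬ V x)
    (hinv : pvInv array target n V (L, M, k))
    (hu0 : L.get? u0 = some l0)
    (hTch : ∀ p lp, L.get? p = some lp → (pvTouch array target n V x p ↔ lp = l0)) :
    pvInv array target n (fun z => V z ∨ z = x)
      (L.insert x l0, M.modify l0 [] (fun lst => lst ++ [x]), k) := by
  obtain ⟨I1, I2, I3, I4, I5⟩ := hinv
  dsimp only at I1 I2 I3 I4 I5
  have hLx : L.get? x = none := by
    cases h : L.get? x with
    | none => rfl
    | some l => exact absurd ((I1 x).mp (by simp [h])) hVx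
  obtain ⟨lst0, hlst0⟩ : ∃ lst0, M.get? l0 = some lst0 :=
    Option.isSome_iff_exists.mp (I4 u0 l0 hu0)
  have hL' : ∀ q, (L.insert x l0).get? q = if q = x then some l0 else L.get? q :=
    fun q => PySem.Dict.get?_insert L x q l0
  have hM' : ∀ l, (M.modify l0 [] (fun lst => lst ++ [x])).get? l =
      if l = l0 then some (lst0 ++ [x]) else M.get? l := by
    intro l
    simp only [PySem.Dict.modify]
    rw [PySem.Dict.get?_insert, PySem.Dict.getD_eq_get?_getD, hlst0]
    simp only [Option.getD_some]
  refine ⟨?_, ?_, ?_, ?_, ?_⟩ <;> dsimp only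
  · intro q
    rw [hL' q]
    by_cases hq : q = x <;> simp [hq, I1 q]
  · intro p q lp lq hp hq
    rw [hL'] at hp hq
    by_cases hpx : p = x <;> by_cases hqx : q = x
    · rw [if_pos hpx] at hp
      rw [if_pos hqx] at hq
      cases hp; cases hq
      rw [hpx, hqx]
      exact ⟨fun _ => Relation.ReflTransGen.refl, fun _ => rfl⟩
    · rw [if_pos hpx] at hp
      rw [if_neg hqx] at hq
      cases hp
      have hVq : V q := (I1 q).mp (by simp [hq])
      rw [hpx, pv_conn_add_x array target n V x hVx hVq, hTch q lq hq]
      omega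
    · rw [if_pos hqx] at hq
      rw [if_neg hpx] at hp
      cases hq
      have hVp : V p := (I1 p).mp (by simp [hp])
      have hsy : pvConn array target n (fun z => V z ∨ z = x) p x ↔
          pvConn array target n (fun z => V z ∨ z = x) x p :=
        ⟨pv_conn_symm, pv_conn_symm⟩
      rw [hqx, hsy, pv_conn_add_x array target n V x hVx hVp, hTch p lp hp]
    · rw [if_neg hpx] at hp
      rw [if_neg hqx] at hq
      have hVp : V p := (I1 p).mp (by simp [hp])
      have hVq : V q := (I1 q).mp (by simp [hq])
      rw [pv_conn_add_old array target n V x hVx hVp hVq,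
        ← I2 p q lp lq hp hq, hTch p lp hp, hTch q lq hq]
      omega
  · intro l lst hl
    rw [hM'] at hl
    by_cases hll0 : l = l0
    · rw [if_pos hll0] at hl
      cases hl
      intro p
      rw [hll0, hL', List.mem_append, List.mem_singleton, I3 l0 lst0 hlst0 p]
      by_cases hpx : p = x
      · rw [if_pos hpx]
        simp [hpx]
      · rw [if_neg hpx]
        simp [hpx]
    · rw [if_neg hll0] at hl
      intro p
      rw [I3 l lst hl p, hL']
      by_cases hpx : p = x
      · rw [if_pos hpx, hpx, hLx]
        constructor
        · intro hcc
          cases hcc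
        · intro hcc
          injection hcc with hcc
          omega
      · rw [if_neg hpx]
  · intro q l hq
    rw [hL'] at hq
    rw [hM']
    by_cases hqx : q = x
    · rw [if_pos hqx] at hq
      cases hq
      simp
    · rw [if_neg hqx] at hq
      by_cases hll0 : l = l0
      · simp [hll0]
      · rw [if_neg hll0]
        exact I4 q l hq
  · intro q l hq
    rw [hL'] at hq
    by_cases hqx : q = x
    · rw [if_pos hqx] at hq
      cases hq
      exact I5 u0 l0 hu0
    · rw [if_neg hqx] at hq
      exact I5 q l hq

-- the merge branch of the scan step preserves the invariant
theorem pv_step_merge (array : List (List Int)) (target n : Int) (V : Int × Int → Prop)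
    (L : PySem.Dict (Int × Int) Int) (M : PySem.Dict Int (List (Int × Int))) (k : Int)
    (x : Int × Int) (l1 l2 : Int) (u1 u2 : Int × Int) (hVx : ¬ V x)
    (hinv : pvInv array target n V (L, M, k))
    (hu1 : L.get? u1 = some l1) (hu2 : L.get? u2 = some l2) (hne : l1 ≠ l2)
    (hTch : ∀ p lp, L.get? p = some lp →
      (pvTouch array target n V x p ↔ (lp = l1 ∨ lp = l2))) :
    pvInv array target n (fun z => V z ∨ z = x)
      ((((M.get? l2).getD []).foldl (fun d cell => d.insert cell l1) L).insert x l1,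
       (((M.modify l1 [] (fun lst => lst ++ ((M.get? l2).getD []))).erase l2).modify l1 []
         (fun lst => lst ++ [x])),
       k) := by
  obtain ⟨I1, I2, I3, I4, I5⟩ := hinv
  dsimp only at I1 I2 I3 I4 I5
  have hLx : L.get? x = none := by
    cases h : L.get? x with
    | none => rfl
    | some l => exact absurd ((I1 x).mp (by simp [h])) hVx
  obtain ⟨lst1, hlst1⟩ : ∃ l, M.get? l1 = some l := Option.isSome_iff_exists.mp (I4 u1 l1 hu1)
  obtain ⟨lst2, hlst2⟩ : ∃ l, M.get? l2 = some l := Option.isSome_iff_exists.mp (I4 u2 l2 hu2)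
  have hdrop : (M.get? l2).getD [] = lst2 := by rw [hlst2]; rfl
  have hmem2 : ∀ p, p ∈ lst2 ↔ L.get? p = some l2 := I3 l2 lst2 hlst2
  have hL' : ∀ q, ((((M.get? l2).getD []).foldl
        (fun d cell => d.insert cell l1) L).insert x l1).get? q =
      if q = x then some l1 else
        if L.get? q = some l2 then some l1 else L.get? q := by
    intro q
    rw [PySem.Dict.get?_insert]
    by_cases hqx : q = x
    · rw [if_pos hqx, if_pos hqx]
    · rw [if_neg hqx, if_neg hqx, hdrop, pv_get?_foldl_insert]
      by_cases h2 : L.get? q = some l2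
      · rw [if_pos ((hmem2 q).mpr h2), if_pos h2]
      · rw [if_neg (fun h => h2 ((hmem2 q).mp h)), if_neg h2]
  have hM' : ∀ l, ((((M.modify l1 [] (fun lst => lst ++ ((M.get? l2).getD []))).erase l2).modify
        l1 [] (fun lst => lst ++ [x])).get? l) =
      if l = l2 then none else
        if l = l1 then some ((lst1 ++ lst2) ++ [x]) else M.get? l := by
    intro l
    simp only [PySem.Dict.modify, hdrop]
    have hgd : M.getD l1 [] = lst1 := by
      rw [PySem.Dict.getD_eq_get?_getD, hlst1]
      rfl
    rw [hgd]
    have he : ∀ m, (((M.insert l1 (lst1 ++ lst2)).erase l2).get? m)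
        = if m = l2 then none else (M.insert l1 (lst1 ++ lst2)).get? m :=
      fun m => pv_get?_erase _ l2 m
    have hgd2 : ((M.insert l1 (lst1 ++ lst2)).erase l2).getD l1 [] = lst1 ++ lst2 := by
      rw [PySem.Dict.getD_eq_get?_getD, he l1, if_neg hne, PySem.Dict.get?_insert_self]
      rfl
    rw [hgd2, PySem.Dict.get?_insert]
    by_cases hl1 : l = l1
    · rw [if_pos hl1, if_neg (by omega : ¬ l = l2), if_pos hl1]
    · rw [if_neg hl1, he l]
      by_cases hl2 : l = l2
      · rw [if_pos hl2, if_pos hl2]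
      · rw [if_neg hl2, if_neg hl2, PySem.Dict.get?_insert, if_neg hl1, if_neg hl1]
  refine ⟨?_, ?_, ?_, ?_, ?_⟩ <;> dsimp only
  · intro q
    rw [hL' q]
    by_cases hqx : q = x
    · simp [hqx]
    · rw [if_neg hqx]
      by_cases h2 : L.get? q = some l2
      · rw [if_pos h2]
        simp only [Option.isSome_some, true_iff]
        exact Or.inl ((I1 q).mp (by simp [h2]))
      · rw [if_neg h2]
        simp [hqx, I1 q]
  · intro p q lp lq hp hq
    rw [hL'] at hp hq
    by_cases hpx : p = x <;> by_cases hqx : q = x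
    · rw [if_pos hpx] at hp
      rw [if_pos hqx] at hq
      cases hp; cases hq
      rw [hpx, hqx]
      exact ⟨fun _ => Relation.ReflTransGen.refl, fun _ => rfl⟩
    · rw [if_pos hpx] at hp
      rw [if_neg hqx] at hq
      cases hp
      obtain ⟨lq0, hq0, hlq⟩ : ∃ l, L.get? q = some l ∧ lq = if l = l2 then l1 else l := by
        by_cases h2 : L.get? q = some l2
        · rw [if_pos h2] at hq
          cases hq
          exact ⟨l2, h2, by rw [if_pos rfl]⟩
        · rw [if_neg h2] at hq
          refine ⟨lq, hq, ?_⟩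
          rw [if_neg (fun h => h2 (by rw [hq, h]))]
      have hVq : V q := (I1 q).mp (by simp [hq0])
      rw [hpx, pv_conn_add_x array target n V x hVx hVq, hTch q lq0 hq0]
      subst hlq
      by_cases h2 : lq0 = l2
      · rw [if_pos h2]
        omega
      · rw [if_neg h2]
        omega
    · rw [if_pos hqx] at hq
      rw [if_neg hpx] at hp
      cases hq
      obtain ⟨lp0, hp0, hlp⟩ : ∃ l, L.get? p = some l ∧ lp = if l = l2 then l1 else l := by
        by_cases h2 : L.get? p = some l2
        · rw [if_pos h2] at hp
          cases hp
          exact ⟨l2, h2, by rw [if_pos rfl]⟩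
        · rw [if_neg h2] at hp
          refine ⟨lp, hp, ?_⟩
          rw [if_neg (fun h => h2 (by rw [hp, h]))]
      have hVp : V p := (I1 p).mp (by simp [hp0])
      have hsy : pvConn array target n (fun z => V z ∨ z = x) p x ↔
          pvConn array target n (fun z => V z ∨ z = x) x p :=
        ⟨pv_conn_symm, pv_conn_symm⟩
      rw [hqx, hsy, pv_conn_add_x array target n V x hVx hVp, hTch p lp0 hp0]
      subst hlp
      by_cases h2 : lp0 = l2
      · rw [if_pos h2]
        omega
      · rw [if_neg h2]
        omega
    · rw [if_neg hpx] at hp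
      rw [if_neg hqx] at hq
      obtain ⟨lp0, hp0, hlp⟩ : ∃ l, L.get? p = some l ∧ lp = if l = l2 then l1 else l := by
        by_cases h2 : L.get? p = some l2
        · rw [if_pos h2] at hp
          cases hp
          exact ⟨l2, h2, by rw [if_pos rfl]⟩
        · rw [if_neg h2] at hp
          refine ⟨lp, hp, ?_⟩
          rw [if_neg (fun h => h2 (by rw [hp, h]))]
      obtain ⟨lq0, hq0, hlq⟩ : ∃ l, L.get? q = some l ∧ lq = if l = l2 then l1 else l := by
        by_cases h2 : L.get? q = some l2
        · rw [if_pos h2] at hq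
          cases hq
          exact ⟨l2, h2, by rw [if_pos rfl]⟩
        · rw [if_neg h2] at hq
          refine ⟨lq, hq, ?_⟩
          rw [if_neg (fun h => h2 (by rw [hq, h]))]
      have hVp : V p := (I1 p).mp (by simp [hp0])
      have hVq : V q := (I1 q).mp (by simp [hq0])
      rw [pv_conn_add_old array target n V x hVx hVp hVq,
        ← I2 p q lp0 lq0 hp0 hq0, hTch p lp0 hp0, hTch q lq0 hq0]
      subst hlp
      subst hlq
      by_cases h2p : lp0 = l2 <;> by_cases h2q : lq0 = l2
      · rw [if_pos h2p, if_pos h2q]; omega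
      · rw [if_pos h2p, if_neg h2q]; omega
      · rw [if_neg h2p, if_pos h2q]; omega
      · rw [if_neg h2p, if_neg h2q]; omega
  · intro l lst hl
    rw [hM'] at hl
    by_cases hl2 : l = l2
    · rw [if_pos hl2] at hl
      cases hl
    · rw [if_neg hl2] at hl
      by_cases hl1 : l = l1
      · rw [if_pos hl1] at hl
        cases hl
        intro p
        rw [hl1, hL', List.mem_append, List.mem_append, List.mem_singleton,
          I3 l1 lst1 hlst1 p, hmem2 p]
        by_cases hpx : p = x
        · rw [if_pos hpx]
          simp [hpx]
        · rw [if_neg hpx]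
          by_cases h2 : L.get? p = some l2
          · rw [if_pos h2]
            simp [hpx, h2]
          · rw [if_neg h2]
            simp [hpx, h2]
      · rw [if_neg hl1] at hl
        intro p
        rw [I3 l lst hl p, hL']
        by_cases hpx : p = x
        · rw [if_pos hpx, hpx, hLx]
          constructor
          · intro hcc
            cases hcc
          · intro hcc
            injection hcc with hcc
            omega
        · rw [if_neg hpx]
          by_cases h2 : L.get? p = some l2
          · rw [if_pos h2, h2]
            constructor
            · intro hcc
              injection hcc with hcc
              omega
            · intro hcc
              injection hcc with hcc
              omega
          · rw [if_neg h2]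
  · intro q l hq
    rw [hL'] at hq
    rw [hM']
    by_cases hqx : q = x
    · rw [if_pos hqx] at hq
      cases hq
      rw [if_neg (by omega : ¬ l1 = l2), if_pos rfl]
      simp
    · rw [if_neg hqx] at hq
      by_cases h2 : L.get? q = some l2
      · rw [if_pos h2] at hq
        cases hq
        rw [if_neg (by omega : ¬ l1 = l2), if_pos rfl]
        simp
      · rw [if_neg h2] at hq
        have hlne2 : ¬ l = l2 := fun h => h2 (by rw [hq, h])
        rw [if_neg hlne2]
        by_cases hl1 : l = l1
        · rw [if_pos hl1]
          simp
        · rw [if_neg hl1]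
          exact I4 q l hq
  · intro q l hq
    rw [hL'] at hq
    by_cases hqx : q = x
    · rw [if_pos hqx] at hq
      cases hq
      exact I5 u1 l1 hu1
    · rw [if_neg hqx] at hq
      by_cases h2 : L.get? q = some l2
      · rw [if_pos h2] at hq
        cases hq
        exact I5 u1 l1 hu1
      · rw [if_neg h2] at hq
        exact I5 q l hq

theorem pv_label_step (array : List (List Int)) (target n : Int)
    (V : Int × Int → Prop)
    (st : PySem.Dict (Int × Int) Int × PySem.Dict Int (List (Int × Int)) × Int)
    (x : Int × Int)
    (hg : pvInGrid n x = true)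
    (hVchar : ∀ q, V q ↔ (pvTc array target n q ∧ pvLexLt q x))
    (hinv : pvInv array target n V st) :
    pvInv array target n (fun q => V q ∨ (pvTc array target n q ∧ q = x))
      (pvLabelStep array target x.1 st x.2) := by
  rcases st with ⟨L, M, k⟩
  have hVx : ¬ V x := by
    intro h
    rcases ((hVchar x).mp h).2 with h1 | h1 <;> omega
  by_cases hT : (pvAt array x.1 x.2 == target) = true
  · have htc : pvTc array target n x := ⟨hg, beq_iff_eq.mp hT⟩
    obtain ⟨I1, I2, I3, I4, I5⟩ := hinv
    have hnbrV : ∀ u, V u → u ∈ pvNbrs x → u = (x.1 - 1, x.2) ∨ u = (x.1, x.2 - 1) := by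
      intro u hVu hu
      have hlex := ((hVchar u).mp hVu).2
      simp only [pvNbrs, List.mem_cons, List.not_mem_nil, or_false] at hu
      rcases hu with rfl | rfl | rfl | rfl
      · exfalso
        rcases hlex with h | ⟨h, h'⟩ <;> simp only [pvLexLt] at * <;> omega
      · exfalso
        rcases hlex with h | ⟨h, h'⟩ <;> simp only [pvLexLt] at * <;> omega
      · exact Or.inl rfl
      · exact Or.inr rfl
    have hadjup : V (x.1 - 1, x.2) → pvAdj array target n x (x.1 - 1, x.2) := by
      intro hVu
      exact ⟨htc, ((hVchar _).mp hVu).1, by simp [pvNbrs]⟩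
    have hadjlf : V (x.1, x.2 - 1) → pvAdj array target n x (x.1, x.2 - 1) := by
      intro hVu
      exact ⟨htc, ((hVchar _).mp hVu).1, by simp [pvNbrs]⟩
    have hTouch : ∀ p, pvTouch array target n V x p ↔
        (V p ∧ ((V (x.1 - 1, x.2) ∧ pvConn array target n V p (x.1 - 1, x.2)) ∨
                (V (x.1, x.2 - 1) ∧ pvConn array target n V p (x.1, x.2 - 1)))) := by
      intro p
      constructor
      · rintro ⟨hVp, u, hVu, hadjx, hconn⟩
        rcases hnbrV u hVu hadjx.2.2 with rfl | rfl
        · exact ⟨hVp, Or.inl ⟨hVu, hconn⟩⟩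
        · exact ⟨hVp, Or.inr ⟨hVu, hconn⟩⟩
      · rintro ⟨hVp, (⟨hVu, hconn⟩ | ⟨hVu, hconn⟩)⟩
        · exact ⟨hVp, _, hVu, hadjup hVu, hconn⟩
        · exact ⟨hVp, _, hVu, hadjlf hVu, hconn⟩
    have hWiff : ∀ q, (V q ∨ q = x) ↔ (V q ∨ (pvTc array target n q ∧ q = x)) := by
      intro q
      constructor
      · rintro (h | rfl)
        · exact Or.inl h
        · exact Or.inr ⟨htc, rfl⟩
      · rintro (h | ⟨-, rfl⟩)
        · exact Or.inl h
        · exact Or.inr rfl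
    refine pvInv_congr hWiff ?_
    simp only [pvLabelStep, if_pos hT]
    cases hlu : L.get? (x.1 - 1, x.2) with
    | none =>
      cases hll : L.get? (x.1, x.2 - 1) with
      | none =>
        dsimp only
        simp only [Prod.mk.eta]
        have hT0 : ∀ p, ¬ pvTouch array target n V x p := by
          intro p hp
          rcases (hTouch p).mp hp with ⟨-, (⟨hVu, -⟩ | ⟨hVu, -⟩)⟩
          · have hs := (I1 _).mpr hVu
            rw [hlu] at hs
            simp at hs
          · have hs := (I1 _).mpr hVu
            rw [hll] at hs
            simp at hs
        exact pv_step_fresh array target n V L M k x hVx ⟨I1, I2, I3, I4, I5⟩ hT0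
      | some l2 =>
        dsimp only
        simp only [Prod.mk.eta]
        have hTch : ∀ p lp, L.get? p = some lp →
            (pvTouch array target n V x p ↔ lp = l2) := by
          intro p lp hp
          have hVp : V p := (I1 p).mp (by simp [hp])
          have hVlf : V (x.1, x.2 - 1) := (I1 _).mp (by simp [hll])
          rw [hTouch p]
          constructor
          · rintro ⟨-, (⟨hVu, -⟩ | ⟨-, hconn⟩)⟩
            · have hs := (I1 _).mpr hVu
              rw [hlu] at hs
              simp at hs
            · exact (I2 p _ lp l2 hp hll).mpr hconn
          · intro h
            exact ⟨hVp, Or.inr ⟨hVlf, (I2 p _ lp l2 hp hll).mp h⟩⟩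
        exact pv_step_join array target n V L M k x l2 _ hVx ⟨I1, I2, I3, I4, I5⟩ hll hTch
    | some l1 =>
      cases hll : L.get? (x.1, x.2 - 1) with
      | none =>
        dsimp only
        simp only [Prod.mk.eta]
        have hTch : ∀ p lp, L.get? p = some lp →
            (pvTouch array target n V x p ↔ lp = l1) := by
          intro p lp hp
          have hVp : V p := (I1 p).mp (by simp [hp])
          have hVup : V (x.1 - 1, x.2) := (I1 _).mp (by simp [hlu])
          rw [hTouch p]
          constructor
          · rintro ⟨-, (⟨-, hconn⟩ | ⟨hVu, -⟩)⟩
            · exact (I2 p _ lp l1 hp hlu).mpr hconn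
            · have hs := (I1 _).mpr hVu
              rw [hll] at hs
              simp at hs
          · intro h
            exact ⟨hVp, Or.inl ⟨hVup, (I2 p _ lp l1 hp hlu).mp h⟩⟩
        exact pv_step_join array target n V L M k x l1 _ hVx ⟨I1, I2, I3, I4, I5⟩ hlu hTch
      | some l2 =>
        dsimp only
        have hVup : V (x.1 - 1, x.2) := (I1 _).mp (by simp [hlu])
        have hVlf : V (x.1, x.2 - 1) := (I1 _).mp (by simp [hll])
        by_cases heq : l1 = l2
        · rw [if_pos (beq_iff_eq.mpr heq)]
          simp only [Prod.mk.eta]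
          have hTch : ∀ p lp, L.get? p = some lp →
              (pvTouch array target n V x p ↔ lp = l1) := by
            intro p lp hp
            have hVp : V p := (I1 p).mp (by simp [hp])
            rw [hTouch p]
            constructor
            · rintro ⟨-, (⟨-, hconn⟩ | ⟨-, hconn⟩)⟩
              · exact (I2 p _ lp l1 hp hlu).mpr hconn
              · have hs := (I2 p _ lp l2 hp hll).mpr hconn
                omega
            · intro h
              exact ⟨hVp, Or.inl ⟨hVup, (I2 p _ lp l1 hp hlu).mp h⟩⟩
          exact pv_step_join array target n V L M k x l1 _ hVx ⟨I1, I2, I3, I4, I5⟩ hlu hTch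
        · rw [if_neg (fun h => heq (beq_iff_eq.mp h))]
          simp only [Prod.mk.eta]
          have hTch : ∀ p lp, L.get? p = some lp →
              (pvTouch array target n V x p ↔ (lp = l1 ∨ lp = l2)) := by
            intro p lp hp
            have hVp : V p := (I1 p).mp (by simp [hp])
            rw [hTouch p]
            constructor
            · rintro ⟨-, (⟨-, hconn⟩ | ⟨-, hconn⟩)⟩
              · exact Or.inl ((I2 p _ lp l1 hp hlu).mpr hconn)
              · exact Or.inr ((I2 p _ lp l2 hp hll).mpr hconn)
            · rintro (h | h)
              · exact ⟨hVp, Or.inl ⟨hVup, (I2 p _ lp l1 hp hlu).mp h⟩⟩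
              · exact ⟨hVp, Or.inr ⟨hVlf, (I2 p _ lp l2 hp hll).mp h⟩⟩
          exact pv_step_merge array target n V L M k x l1 l2 _ _ hVx
            ⟨I1, I2, I3, I4, I5⟩ hlu hll heq hTch
  · have hnt : ¬ pvTc array target n x := fun h => hT (beq_iff_eq.mpr h.2)
    have hWV : ∀ q, V q ↔ (V q ∨ (pvTc array target n q ∧ q = x)) := by
      intro q
      constructor
      · exact Or.inl
      · rintro (h | ⟨h1, rfl⟩)
        · exact h
        · exact absurd h1 hnt
    have hid : pvLabelStep array target x.1 (L, M, k) x.2 = (L, M, k) := by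
      simp only [pvLabelStep, if_neg hT]
    rw [hid]
    exact pvInv_congr hWV hinv

theorem pv_label_loop (array : List (List Int)) (target n : Int) :
    ∀ (suffix done : List (Int × Int))
      (st : PySem.Dict (Int × Int) Int × PySem.Dict Int (List (Int × Int)) × Int),
    pvGridCells n = done ++ suffix →
    pvInv array target n (fun q => pvTc array target n q ∧ q ∈ done) st →
    pvInv array target n (fun q => pvTc array target n q ∧ q ∈ done ++ suffix)
      (suffix.foldl (fun st p => pvLabelStep array target p.1 st p.2) st) := by
  intro suffix
  induction suffix with
  | nil =>
    intro done st hsplit hinv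
    simpa using hinv
  | cons x rest ih =>
    intro done st hsplit hinv
    obtain ⟨hg, hdone⟩ := pv_grid_split n done rest x hsplit
    have hVchar : ∀ q, (pvTc array target n q ∧ q ∈ done) ↔
        (pvTc array target n q ∧ pvLexLt q x) := by
      intro q
      constructor
      · rintro ⟨htc, hq⟩
        exact ⟨htc, ((hdone q).mp hq).2⟩
      · rintro ⟨htc, hlex⟩
        exact ⟨htc, (hdone q).mpr ⟨htc.1, hlex⟩⟩
    have hstep := pv_label_step array target n _ st x hg hVchar hinv
    have hstep' : pvInv array target n (fun q => pvTc array target n q ∧ q ∈ done ++ [x])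
        (pvLabelStep array target x.1 st x.2) := by
      refine pvInv_congr ?_ hstep
      intro q
      simp only [List.mem_append, List.mem_singleton]
      constructor
      · rintro (⟨h1, h2⟩ | ⟨h1, rfl⟩)
        · exact ⟨h1, Or.inl h2⟩
        · exact ⟨h1, Or.inr rfl⟩
      · rintro ⟨h1, h2 | h2⟩
        · exact Or.inl ⟨h1, h2⟩
        · exact Or.inr ⟨h1, h2⟩
    have hsplit' : pvGridCells n = (done ++ [x]) ++ rest := by
      rw [hsplit, List.append_assoc]
      rfl
    have hres := ih (done ++ [x]) _ hsplit' hstep'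
    rw [List.foldl_cons]
    refine pvInv_congr ?_ hres
    intro q
    simp only [List.mem_append, List.mem_cons]
    tauto

theorem pv_foldl_grid {σ : Type} (n : Int) (F : σ → Int × Int → σ) (init : σ) :
    (PySem.List.pyRange 0 n 1).foldl (fun st r =>
      (PySem.List.pyRange 0 n 1).foldl (fun st c => F st (r, c)) st) init
    = (pvGridCells n).foldl F init := by
  rw [pvGridCells, List.foldl_flatMap]
  simp only [List.foldl_map]

theorem pvLabelScan_eq (array : List (List Int)) (target n : Int) :
    pvLabelScan array target n =
      (pvGridCells n).foldl (fun st p => pvLabelStep array target p.1 st p.2)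
        (PySem.Dict.empty, PySem.Dict.empty, 0) := by
  unfold pvLabelScan
  exact pv_foldl_grid n (fun st p => pvLabelStep array target p.1 st p.2)
    (PySem.Dict.empty, PySem.Dict.empty, 0)

theorem pvEmitScan_eq (array : List (List Int)) (target : Int)
    (L : PySem.Dict (Int × Int) Int) (M : PySem.Dict Int (List (Int × Int))) (n : Int) :
    pvEmitScan array target L M n =
      (pvGridCells n).foldl (fun st p => pvEmitStep array target L M p.1 st p.2)
        (PySem.Set.empty, []) := by
  unfold pvEmitScan
  exact pv_foldl_grid n (fun st p => pvEmitStep array target L M p.1 st p.2)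
    (PySem.Set.empty, [])

theorem pv_emit_loop (array : List (List Int)) (target n : Int)
    (L : PySem.Dict (Int × Int) Int) (M : PySem.Dict Int (List (Int × Int)))
    (hL1 : ∀ q, (L.get? q).isSome ↔ pvTc array target n q)
    (hL2 : ∀ p q lp lq, L.get? p = some lp → L.get? q = some lq →
      (lp = lq ↔ pvReach array target n p q))
    (hM : ∀ l lst, M.get? l = some lst → ∀ p, p ∈ lst ↔ L.get? p = some l)
    (hMk : ∀ q l, L.get? q = some l → (M.get? l).isSome) :
    ∀ (cells : List (Int × Int)), (∀ p ∈ cells, pvInGrid n p = true) →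
    ∀ (vA : Int × Int → Bool) (em : PySem.Set Int) (LA LB : List (List (List Int))),
    (∀ p, vA p = true ↔ ∃ l, L.get? p = some l ∧ l ∈ em) →
    LA = LB →
    ((cells.foldl (fun (st : ((Int × Int) → Bool) × List (List (List Int))) p =>
      if !st.1 p && (pvAt array p.1 p.2 == target) then
        ((pvBfsLoop array target n st.1 [p] []).2,
          st.2 ++ [pvStd (pvBfsLoop array target n st.1 [p] []).1])
      else st) (vA, LA)).2 =
     (cells.foldl (fun st p => pvEmitStep array target L M p.1 st p.2) (em, LB)).2) := by
  intro cells
  induction cells with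
  | nil =>
    intro _ vA em LA LB _ W3
    exact W3
  | cons x cs ih =>
    intro hcells vA em LA LB W1 W3
    have hgx : pvInGrid n x = true := hcells x List.mem_cons_self
    have hcs : ∀ p ∈ cs, pvInGrid n p = true := fun p hp => hcells p (List.mem_cons_of_mem _ hp)
    simp only [List.foldl_cons]
    by_cases hT : (pvAt array x.1 x.2 == target) = true
    · have htcx : pvTc array target n x := ⟨hgx, beq_iff_eq.mp hT⟩
      obtain ⟨lab0, hlab0⟩ : ∃ l, L.get? x = some l :=
        Option.isSome_iff_exists.mp ((hL1 x).mpr htcx)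
      have hstepB : pvEmitStep array target L M x.1 (em, LB) x.2 =
          (if PySem.Set.contains em lab0 then (em, LB)
           else (PySem.Set.add em lab0, LB ++ [pvStdB ((M.get? lab0).getD [])])) := by
        simp only [pvEmitStep, if_pos hT, Prod.mk.eta, hlab0, Option.getD_some]
      have hvx_iff : vA x = true ↔ lab0 ∈ em := by
        rw [W1 x]
        constructor
        · rintro ⟨l, hl, hlm⟩
          rw [hlab0] at hl
          injection hl with hl
          rw [hl]
          exact hlm
        · intro h
          exact ⟨lab0, hlab0, h⟩
      by_cases hv : vA x = true
      · -- already emitted: both scans skip this cell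
        have hA : (!vA x && (pvAt array x.1 x.2 == target)) = false := by
          rw [hv]; rfl
        have hct : PySem.Set.contains em lab0 = true :=
          (PySem.Set.contains_iff em lab0).mpr (hvx_iff.mp hv)
        rw [if_neg (by rw [hA]; exact Bool.false_ne_true), hstepB, if_pos hct]
        exact ih hcs vA em LA LB W1 W3
      · -- a new component: both scans emit the same block
        have hA : (!vA x && (pvAt array x.1 x.2 == target)) = true := by
          rw [Bool.and_eq_true, hT]
          exact ⟨by simp [hv], rfl⟩
        have hnem : lab0 ∉ em := fun h => hv (hvx_iff.mpr h)
        have hcf : ¬ (PySem.Set.contains em lab0 = true) :=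
          fun h => hnem ((PySem.Set.contains_iff em lab0).mp h)
        rw [if_pos hA, hstepB, if_neg hcf]
        have hclA : pvClosed array target n (fun p => vA p = true) := by
          intro p q hp hadj
          obtain ⟨l, hLp, hlem⟩ := (W1 p).mp hp
          obtain ⟨lq, hLq⟩ : ∃ l, L.get? q = some l :=
            Option.isSome_iff_exists.mp ((hL1 q).mpr hadj.2.1)
          have hle : l = lq :=
            (hL2 p q l lq hLp hLq).mpr (Relation.ReflTransGen.single hadj)
          exact (W1 q).mpr ⟨lq, hLq, hle ▸ hlem⟩
        obtain ⟨A1, A2⟩ := pvBfs_correct array target n x vA htcx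
          (Bool.eq_false_iff.mpr hv) hclA
        have hreach_label : ∀ p, pvReach array target n x p ↔ L.get? p = some lab0 := by
          intro p
          constructor
          · intro hp
            have htcp : pvTc array target n p := pv_reach_tc htcx hp
            obtain ⟨lp, hLp⟩ : ∃ l, L.get? p = some l :=
              Option.isSome_iff_exists.mp ((hL1 p).mpr htcp)
            have hlab : lab0 = lp := (hL2 x p lab0 lp hlab0 hLp).mpr hp
            rw [hLp, ← hlab]
          · intro hp
            exact pv_reach_symm ((hL2 p x lab0 lab0 hp hlab0).mp rfl)
        obtain ⟨lst, hlst⟩ : ∃ l, M.get? lab0 = some l :=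
          Option.isSome_iff_exists.mp (hMk x lab0 hlab0)
        have hmemb : ∀ p, p ∈ (pvBfsLoop array target n vA [x] []).1 ↔ p ∈ lst := by
          intro p
          rw [A1 p, hM lab0 lst hlst p, hreach_label p]
        have hblock : pvStd (pvBfsLoop array target n vA [x] []).1 =
            pvStdB ((M.get? lab0).getD []) := by
          rw [hlst, Option.getD_some]
          exact pvStd_eq_pvStdB _ lst x ((A1 x).mpr Relation.ReflTransGen.refl) hmemb
        have W1' : ∀ p, (pvBfsLoop array target n vA [x] []).2 p = true ↔
            ∃ l, L.get? p = some l ∧ l ∈ PySem.Set.add em lab0 := by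
          intro p
          rw [A2 p]
          constructor
          · rintro (h | h)
            · obtain ⟨l, hl, hlm⟩ := (W1 p).mp h
              exact ⟨l, hl, (PySem.Set.mem_add _ _ _).mpr (Or.inl hlm)⟩
            · exact ⟨lab0, (hreach_label p).mp h,
                (PySem.Set.mem_add _ _ _).mpr (Or.inr rfl)⟩
          · rintro ⟨l, hl, hlm⟩
            rcases (PySem.Set.mem_add _ _ _).mp hlm with h | rfl
            · exact Or.inl ((W1 p).mpr ⟨l, hl, h⟩)
            · exact Or.inr ((hreach_label p).mpr hl)
        have W3' : LA ++ [pvStd (pvBfsLoop array target n vA [x] []).1] =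
            LB ++ [pvStdB ((M.get? lab0).getD [])] := by
          rw [W3, hblock]
        exact ih hcs _ _ _ _ W1' W3'
    · -- not a target cell: both scans skip
      have hA : (!vA x && (pvAt array x.1 x.2 == target)) = false := by
        rw [Bool.eq_false_iff.mpr hT, Bool.and_false]
      have hstepB : pvEmitStep array target L M x.1 (em, LB) x.2 = (em, LB) := by
        simp only [pvEmitStep, if_neg hT]
      rw [if_neg (by rw [hA]; exact Bool.false_ne_true), hstepB]
      exact ih hcs vA em LA LB W1 W3

set_option maxHeartbeats 800000 in
theorem pv_main (array : List (List Int)) (target : Int) :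
    get_target_blocks array target = get_target_blocks_alt array target := by
  have hA : get_target_blocks array target =
      ((pvGridCells (PySem.List.len array)).foldl
        (fun (st : ((Int × Int) → Bool) × List (List (List Int))) p =>
          if !st.1 p && (pvAt array p.1 p.2 == target) then
            ((pvBfsLoop array target (PySem.List.len array) st.1 [p] []).2,
              st.2 ++ [pvStd (pvBfsLoop array target (PySem.List.len array) st.1 [p] []).1])
          else st) (fun _ => false, [])).2 := by
    rw [get_target_blocks]
    exact congrArg Prod.snd (pv_foldl_grid (PySem.List.len array)
      (fun (st : ((Int × Int) → Bool) × List (List (List Int))) p =>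
          if !st.1 p && (pvAt array p.1 p.2 == target) then
            ((pvBfsLoop array target (PySem.List.len array) st.1 [p] []).2,
              st.2 ++ [pvStd (pvBfsLoop array target (PySem.List.len array) st.1 [p] []).1])
          else st) (fun _ => false, []))
  have hB : get_target_blocks_alt array target =
      ((pvGridCells (PySem.List.len array)).foldl
        (fun st p => pvEmitStep array target
          ((pvGridCells (PySem.List.len array)).foldl
            (fun st p => pvLabelStep array target p.1 st p.2)
            (PySem.Dict.empty, PySem.Dict.empty, 0)).1
          ((pvGridCells (PySem.List.len array)).foldl
            (fun st p => pvLabelStep array target p.1 st p.2)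
            (PySem.Dict.empty, PySem.Dict.empty, 0)).2.1
          p.1 st p.2)
        (PySem.Set.empty, [])).2 := by
    show (pvEmitScan array target (pvLabelScan array target (PySem.List.len array)).1
        (pvLabelScan array target (PySem.List.len array)).2.1 (PySem.List.len array)).2 = _
    rw [pvLabelScan_eq, pvEmitScan_eq]
  set lm := (pvGridCells (PySem.List.len array)).foldl
      (fun st p => pvLabelStep array target p.1 st p.2)
      (PySem.Dict.empty, PySem.Dict.empty, 0) with hlm
  have hinit : pvInv array target (PySem.List.len array)
      (fun q => pvTc array target (PySem.List.len array) q ∧ q ∈ ([] : List (Int × Int)))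
      (PySem.Dict.empty, PySem.Dict.empty, 0) := by
    refine ⟨?_, ?_, ?_, ?_, ?_⟩ <;> dsimp only
    · intro q
      rw [PySem.Dict.get?_empty]
      simp
    · intro p q lp lq hp hq
      rw [PySem.Dict.get?_empty] at hp
      cases hp
    · intro l lst hl
      rw [PySem.Dict.get?_empty] at hl
      cases hl
    · intro q l hq
      rw [PySem.Dict.get?_empty] at hq
      cases hq
    · intro q l hq
      rw [PySem.Dict.get?_empty] at hq
      cases hq
  have hlab := pv_label_loop array target (PySem.List.len array)
    (pvGridCells (PySem.List.len array)) [] (PySem.Dict.empty, PySem.Dict.empty, 0)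
    (by simp) hinit
  have hfin : pvInv array target (PySem.List.len array)
      (pvTc array target (PySem.List.len array)) lm := by
    refine pvInv_congr ?_ hlab
    intro q
    simp only [List.nil_append]
    constructor
    · rintro ⟨h, -⟩
      exact h
    · intro h
      exact ⟨h, (pv_mem_gridCells _ q).mpr h.1⟩
  obtain ⟨F1, F2, F3, F4, F5⟩ := hfin
  have hconnR : ∀ p q, pvConn array target (PySem.List.len array)
      (pvTc array target (PySem.List.len array)) p q ↔
      pvReach array target (PySem.List.len array) p q := by
    intro p q
    constructor
    · exact Relation.ReflTransGen.mono (fun a b h => h.1)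
    · exact Relation.ReflTransGen.mono (fun a b h => ⟨h, h.1, h.2.1⟩)
  have hL2 : ∀ p q lp lq, lm.1.get? p = some lp → lm.1.get? q = some lq →
      (lp = lq ↔ pvReach array target (PySem.List.len array) p q) :=
    fun p q lp lq hp hq => (F2 p q lp lq hp hq).trans (hconnR p q)
  have hmain := pv_emit_loop array target (PySem.List.len array) lm.1 lm.2.1
    F1 hL2 F3 F4 (pvGridCells (PySem.List.len array))
    (fun p hp => (pv_mem_gridCells _ p).mp hp)
    (fun _ => false) PySem.Set.empty [] []
    (by
      intro p
      constructor
      · intro h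
        simp at h
      · rintro ⟨l, -, hl⟩
        simp [PySem.Set.empty] at hl)
    rfl
  rw [hA, hB]
  exact hmain

-- ===== VERDICT (by name: the statement is the Claim_ definition above) =====
theorem get_target_blocks_spec : Claim_equal_get_target_blocks := by
  intro array target _ _
  exact pv_main array target
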